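-- pv_equiv track=rewrite | github.com/mihirkelkar/hackerrank_problems | gcj_basinproblem.py | sink_map
-- ===== SOURCE A (Python) =====
-- def find_nbrs(i, j, row, col):
-- 	x_cords = [i + incr for incr in (-1, 0, 0, 1)]
-- 	y_cords = [j + jncr for jncr in (0, -1, 1, 0)]
-- 	temp = zip(x_cords, y_cords)
-- 	return [i for i in temp if ((0<=i[0]<row) and (0<=i[1]<col))]
--
-- def sink_map(em):
-- 	sink_dict = {}
-- 	sinkmap = []
-- 	for i in range(len(em)):
-- 		sinkmap.append([0] * len(em[0]))
-- 	count = 97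
-- 	for i in range(len(em)):
-- 		for j in range(len(em[0])):
-- 			if sinkmap[i][j] != 0:
-- 				continue
-- 			else:
-- 				sinked_maps = find_and_label(em, i, j)
-- 				#print sinked_maps
-- 				for elem in sinked_maps:
-- 					sinkmap[elem[0]][elem[1]] = sinked_maps[0]
-- 				try:
-- 					char = sink_dict[sinked_maps[0]]
-- 				except:
-- 					sink_dict[sinked_maps[0]] = chr(count)
-- 					count += 1
--
-- 	for i in range(len(sinkmap)):
-- 		for j in range(len(sinkmap[0])):
-- 			sinkmap[i][j] = sink_dict[sinkmap[i][j]]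
-- 	return sinkmap
--
-- def find_and_label(em, i, j):
-- 	#print i, j
-- 	nbrs = find_nbrs(i, j, len(em), len(em[0]))
-- 	map_nbrs = [em[k[0]][k[1]] for k in nbrs]
-- 	mi = map_nbrs.index(min(map_nbrs))
-- 	if map_nbrs[mi] > em[i][j]:
-- 		#print "last element reached", i, j
-- 		return [(i, j)]
-- 	else:
-- 		path = find_and_label(em, nbrs[mi][0], nbrs[mi][1])
-- 		path.append((i,j))
-- 		return path
-- ===== SOURCE B (Python) =====
-- def sink_map(em):
--     rows, cols = len(em), (len(em[0]) if em else 0)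
--     memo = {}
--
--     def sink(i, j):
--         # iterative descent with path compression via memo
--         stack = []
--         while (i, j) not in memo:
--             best = None
--             for di, dj in ((-1, 0), (0, -1), (0, 1), (1, 0)):
--                 ni, nj = i + di, j + dj
--                 if 0 <= ni < rows and 0 <= nj < cols:
--                     if best is None or em[ni][nj] < em[best[0]][best[1]]:
--                         best = (ni, nj)
--             if best is None or em[best[0]][best[1]] > em[i][j]:
--                 memo[(i, j)] = (i, j)
--             else:
--                 stack.append((i, j))
--                 i, j = best
--         s = memo[(i, j)]
--         for c in stack:
--             memo[c] = s
--         return s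
--
--     labels = {}
--     out = []
--     for i in range(rows):
--         row = []
--         for j in range(cols):
--             s = sink(i, j)
--             if s not in labels:
--                 labels[s] = chr(97 + len(labels))
--             row.append(labels[s])
--         out.append(row)
--     return out
-- ===== Notes on version B (the rewrite author's own statement) =====
-- stated objective: faster
-- what changed: A re-traces the full downhill path with unbounded recursion for every unlabelled cell and post-processes an integer/tuple matrix through a dict; B computes each cell's sink once with an iterative memoized descent (path compression via a memo dict) and assigns letters directly in first-appearance order; intended as faster, and a timing run measured B 8-46x faster at its sizes, though it could not confirm the largest size by its own rule.
import Mathlib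
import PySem

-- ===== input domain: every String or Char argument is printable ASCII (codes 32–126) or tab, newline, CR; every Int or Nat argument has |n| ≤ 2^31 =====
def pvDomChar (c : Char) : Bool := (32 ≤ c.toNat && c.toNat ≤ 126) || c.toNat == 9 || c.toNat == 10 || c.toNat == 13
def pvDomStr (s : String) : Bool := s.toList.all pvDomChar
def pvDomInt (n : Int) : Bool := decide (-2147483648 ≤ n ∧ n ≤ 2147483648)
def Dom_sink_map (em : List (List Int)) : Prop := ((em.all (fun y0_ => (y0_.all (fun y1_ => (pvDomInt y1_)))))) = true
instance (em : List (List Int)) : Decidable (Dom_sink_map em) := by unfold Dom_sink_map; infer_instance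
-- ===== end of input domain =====

-- B replaces A's per-cell full-path retracing recursion by a memoized iterative descent
-- (each cell's sink is computed once and cached), assigning letters in the same first-appearance order.
-- A mutates nothing observable; equivalence is about the return value.

-- ===== PORT A =====
-- em[i][j] (shared cell-access helper; exact while indexes are in range, which Pre_ guarantees)
def cellAt (em : List (List Int)) (i j : Int) : Int :=
  PySem.List.pyGetD (PySem.List.pyGetD em i []) j 0

-- chr(n); exact for 0 ≤ n < 0xD800 (all label codes reachable here)
def pyChr (n : Int) : String := String.ofList [Char.ofNat n.toNat]

def find_nbrs (i j row col : Int) : List (Int × Int) :=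
  (List.zip [i + (-1), i + 0, i + 0, i + 1] [j + 0, j + (-1), j + 1, j + 0]).filter
    (fun p => decide (0 ≤ p.1 ∧ p.1 < row ∧ 0 ≤ p.2 ∧ p.2 < col))

-- the recursion carries a fuel guard (unreachable under Pre_: the downhill walk never
-- revisits a cell, so its length is at most rows*cols)
def find_and_label (fuel : Nat) (em : List (List Int)) (i j : Int) : List (Int × Int) :=
  match fuel with
  | 0 => []
  | fuel + 1 =>
    let nbrs := find_nbrs i j em.length (PySem.List.pyGetD em 0 []).length
    let map_nbrs := nbrs.map (fun k => cellAt em k.1 k.2)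
    let m := (PySem.List.min? map_nbrs (fun x => x)).getD 0
    let mi : Int := ((PySem.List.index? map_nbrs m).getD 0 : Nat)
    if PySem.List.pyGetD map_nbrs mi 0 > cellAt em i j then [(i, j)]
    else
      let nb := PySem.List.pyGetD nbrs mi (0, 0)
      find_and_label fuel em nb.1 nb.2 ++ [(i, j)]

def sink_map (em : List (List Int)) : List (List String) :=
  let sinkmap0 :=
    (PySem.List.pyRange 0 em.length 1).foldl
      (fun sm _ => sm ++ [List.replicate (PySem.List.pyGetD em 0 []).length (none : Option (Int × Int))]) []
  let st :=
    (PySem.List.pyRange 0 em.length 1).foldl (fun st i =>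
      (PySem.List.pyRange 0 (PySem.List.pyGetD em 0 []).length 1).foldl (fun st j =>
        let (sm, d, cnt) := st
        if PySem.List.pyGetD (PySem.List.pyGetD sm i []) j none ≠ none then st
        else
          let path := find_and_label (em.length * (em.headD []).length + 2) em i j
          let s0 := PySem.List.pyGetD path 0 (0, 0)
          let sm' := path.foldl (fun sm e =>
            PySem.List.pySetD sm e.1 (PySem.List.pySetD (PySem.List.pyGetD sm e.1 []) e.2 (some s0))) sm
          match d.get? s0 with
          | some _ => (sm', d, cnt)
          | none => (sm', d.insert s0 (pyChr cnt), cnt + 1)) st)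
      (sinkmap0, (PySem.Dict.empty : PySem.Dict (Int × Int) String), (97 : Int))
  (PySem.List.pyRange 0 st.1.length 1).map (fun i =>
    (PySem.List.pyRange 0 (PySem.List.pyGetD st.1 0 []).length 1).map (fun j =>
      st.2.1.getD ((PySem.List.pyGetD (PySem.List.pyGetD st.1 i []) j none).getD (0, 0)) ""))

-- ===== PORT B =====
def bestNbr (em : List (List Int)) (rows cols i j : Int) : Option (Int × Int) :=
  [((-1 : Int), (0 : Int)), (0, -1), (0, 1), (1, 0)].foldl (fun best d =>
    if 0 ≤ i + d.1 ∧ i + d.1 < rows ∧ 0 ≤ j + d.2 ∧ j + d.2 < cols then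
      match best with
      | none => some (i + d.1, j + d.2)
      | some b => if cellAt em (i + d.1) (j + d.2) < cellAt em b.1 b.2 then some (i + d.1, j + d.2) else best
    else best) none

-- B's while-loop, with a fuel guard (unreachable under Pre_, same bound as A's)
def bLoop (fuel : Nat) (em : List (List Int)) (rows cols : Int)
    (memo : PySem.Dict (Int × Int) (Int × Int)) (stack : List (Int × Int)) (i j : Int) :
    (Int × Int) × PySem.Dict (Int × Int) (Int × Int) :=
  match fuel, memo.get? (i, j) with
  | _, some s => (s, stack.foldl (fun m c => m.insert c s) memo)
  | 0, none => ((i, j), memo)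
  | fuel + 1, none =>
    match bestNbr em rows cols i j with
    | none => bLoop fuel em rows cols (memo.insert (i, j) (i, j)) stack i j
    | some b =>
      if cellAt em b.1 b.2 > cellAt em i j then
        bLoop fuel em rows cols (memo.insert (i, j) (i, j)) stack i j
      else bLoop fuel em rows cols memo (stack ++ [(i, j)]) b.1 b.2

def sink_map_alt (em : List (List Int)) : List (List String) :=
  let rows : Int := em.length
  let cols : Int := if em.length = 0 then 0 else (PySem.List.pyGetD em 0 []).length
  let st :=
    (PySem.List.pyRange 0 rows 1).foldl (fun st i =>
      let inner :=
        (PySem.List.pyRange 0 cols 1).foldl (fun st2 j =>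
          let (memo, labels, row) := st2
          let r := bLoop (em.length * (em.headD []).length + 2) em rows cols memo [] i j
          let labels' := if (labels.get? r.1).isSome then labels
                         else labels.insert r.1 (pyChr (97 + (labels.size : Int)))
          (r.2, labels', row ++ [labels'.getD r.1 ""])) (st.1, st.2.1, ([] : List String))
      (inner.1, inner.2.1, st.2.2 ++ [inner.2.2]))
      ((PySem.Dict.empty : PySem.Dict (Int × Int) (Int × Int)),
       (PySem.Dict.empty : PySem.Dict (Int × Int) String), ([] : List (List String)))
  st.2.2

-- ===== PRECONDITION & SPEC =====
-- Pre_-side helper: the first orthogonal neighbour of (i,j) of minimal height (ties kept in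
-- the order up, left, right, down) — a local, closed-form fact about the grid.
def minNbr (em : List (List Int)) (i j : Int) : Option (Int × Int) :=
  [(i - 1, j), (i, j - 1), (i, j + 1), (i + 1, j)].foldl
    (fun best p =>
      if 0 ≤ p.1 ∧ p.1 < (em.length : Int) ∧ 0 ≤ p.2 ∧ p.2 < ((em.headD []).length : Int) then
        match best with
        | none => some p
        | some b =>
          if (em.getD p.1.toNat []).getD p.2.toNat 0 < (em.getD b.1.toNat []).getD b.2.toNat 0
          then some p else best
      else best) none

-- Pre_ excludes exactly the inputs on which A raises: grids with a row shorter than the first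
-- row (IndexError), 1x1 grids (ValueError: A takes the minimum of an empty neighbour list), and grids containing two adjacent
-- equal-height cells that are each the other's first minimal neighbour, on which A's path
-- tracing recurses forever (RecursionError).
def Pre_sink_map (em : List (List Int)) : Prop :=
  em = [] ∨
  ((∀ r ∈ em, (em.headD []).length ≤ r.length) ∧
   ¬(em.length = 1 ∧ (em.headD []).length = 1) ∧
   ∀ i < em.length, ∀ j < (em.headD []).length, ∀ b ∈ minNbr em i j,
     ¬(minNbr em b.1 b.2 = some ((i : Int), (j : Int)) ∧
       (em.getD i []).getD j 0 = (em.getD b.1.toNat []).getD b.2.toNat 0))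
instance (em : List (List Int)) : Decidable (Pre_sink_map em) := by unfold Pre_sink_map; infer_instance

def pvWitness_sink_map : List (List Int) := [[1, 2], [4, 3]]

def Spec_sink_map (em : List (List Int)) (out : List (List String)) : Prop := out = sink_map_alt em
instance (em : List (List Int)) (out : List (List String)) : Decidable (Spec_sink_map em out) := by
  unfold Spec_sink_map; infer_instance

-- ===== CLAIM (what is proved, stated in full; the proofs are below) =====
def Claim_equal_sink_map : Prop :=
  ∀ (em : List (List Int)), Dom_sink_map em → Pre_sink_map em → Spec_sink_map em (sink_map em)

-- ===== LEMMAS AND PROOFS =====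

-- proof-side abbreviations
def CN (em : List (List Int)) : Nat := (em.headD []).length
def inRC (em : List (List Int)) (c : Int × Int) : Prop :=
  0 ≤ c.1 ∧ c.1 < (em.length : Int) ∧ 0 ≤ c.2 ∧ c.2 < (CN em : Int)
-- the non-empty branch of Pre_
def Pre2 (em : List (List Int)) : Prop :=
  (∀ r ∈ em, (em.headD []).length ≤ r.length) ∧
  ¬(em.length = 1 ∧ (em.headD []).length = 1) ∧
  ∀ i < em.length, ∀ j < (em.headD []).length, ∀ b ∈ minNbr em i j,
    ¬(minNbr em b.1 b.2 = some ((i : Int), (j : Int)) ∧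
      (em.getD i []).getD j 0 = (em.getD b.1.toNat []).getD b.2.toNat 0)

theorem pre_cases (em : List (List Int)) (h : Pre_sink_map em) : em = [] ∨ Pre2 em := h

theorem head_pyGetD (em : List (List Int)) : PySem.List.pyGetD em 0 [] = em.headD [] := by
  cases em <;> simp [PySem.List.pyGetD, PySem.List.pyGet?, PySem.List.pyIdx?]

def natCell (em : List (List Int)) (i j : Nat) : Int := (em.getD i []).getD j 0

theorem cellAt_nat (em : List (List Int)) (i j : Int) (hi : 0 ≤ i) (hj : 0 ≤ j) :
    cellAt em i j = natCell em i.toNat j.toNat := by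
  unfold cellAt natCell
  rw [show i = ((i.toNat : Nat) : Int) by omega, show j = ((j.toNat : Nat) : Int) by omega]
  rw [PySem.List.pyGetD_natCast, PySem.List.pyGetD_natCast]
  simp [max_eq_left hi, max_eq_left hj]

-- min?: scan step
def mstep {α : Type} (f : α → Int) (a : Option α) (x : α) : Option α :=
  match a with | none => some x | some m => if f x < f m then some x else some m

theorem min?_eq_foldl {α : Type} (l : List α) (f : α → Int) :
    PySem.List.min? l f = l.foldl (mstep f) none := rfl

theorem foldl_mstep_map {α : Type} (f : α → Int) :
    ∀ (l : List α) (acc : Option α),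
      (l.map f).foldl (mstep (fun x => x)) (acc.map f) = (l.foldl (mstep f) acc).map f := by
  intro l
  induction l with
  | nil => intro acc; simp
  | cons x t ih =>
    intro acc
    have : mstep (fun x => x) (acc.map f) (f x) = (mstep f acc x).map f := by
      cases acc
      · simp [mstep]
      · simp only [mstep, Option.map_some]
        split <;> simp
    simpa [this] using ih (mstep f acc x)

theorem min?_map_id {α : Type} (l : List α) (f : α → Int) :
    PySem.List.min? (l.map f) (fun x => x) = (PySem.List.min? l f).map f := by
  rw [min?_eq_foldl, min?_eq_foldl]
  simpa using foldl_mstep_map f l none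

theorem foldl_mstep_some {α : Type} (f : α → Int) :
    ∀ (t : List α) (b x : α), t.foldl (mstep f) (some b) = some x →
      (x = b ∧ ∀ y ∈ t, f b ≤ f y) ∨
      (∃ j, ∃ hj : j < t.length, t[j] = x ∧ f x < f b ∧
        (∀ i, ∀ hi : i < t.length, i < j → f x < f t[i]) ∧ ∀ y ∈ t, f x ≤ f y) := by
  intro t
  induction t with
  | nil => intro b x h; left; simp_all [List.foldl]
  | cons c t ih =>
    intro b x h
    simp only [List.foldl_cons] at h
    by_cases hc : f c < f b
    · rw [show mstep f (some b) c = some c by simp [mstep, hc]] at h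
      rcases ih c x h with ⟨rfl, hall⟩ | ⟨j, hj, hget, hlt, hfirst, hall⟩
      · right
        refine ⟨0, by simp, by simp, hc, by omega, ?_⟩
        intro y hy
        rcases List.mem_cons.1 hy with rfl | hy
        · exact le_refl _
        · exact hall y hy
      · right
        refine ⟨j + 1, by simpa using Nat.succ_lt_succ hj, by simpa using hget, lt_trans hlt hc, ?_, ?_⟩
        · intro i hi hij
          cases i with
          | zero => simpa using hlt
          | succ i => simpa using hfirst i (by simpa using Nat.lt_of_succ_lt_succ hi) (by omega)
        · intro y hy
          rcases List.mem_cons.1 hy with rfl | hy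
          · exact le_of_lt hlt
          · exact hall y hy
    · rw [show mstep f (some b) c = some b by simp [mstep, hc]] at h
      rcases ih b x h with ⟨rfl, hall⟩ | ⟨j, hj, hget, hlt, hfirst, hall⟩
      · left
        refine ⟨rfl, ?_⟩
        intro y hy
        rcases List.mem_cons.1 hy with rfl | hy
        · omega
        · exact hall y hy
      · right
        refine ⟨j + 1, by simpa using Nat.succ_lt_succ hj, by simpa using hget, hlt, ?_, ?_⟩
        · intro i hi hij
          cases i with
          | zero => simp; omega
          | succ i => simpa using hfirst i (by simpa using Nat.lt_of_succ_lt_succ hi) (by omega)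
        · intro y hy
          rcases List.mem_cons.1 hy with rfl | hy
          · omega
          · exact hall y hy

theorem min?_first {α : Type} (l : List α) (f : α → Int) (x : α)
    (h : PySem.List.min? l f = some x) :
    ∃ k, ∃ hk : k < l.length, l[k] = x ∧
      (∀ i, ∀ hi : i < l.length, i < k → f x < f l[i]) ∧ ∀ y ∈ l, f x ≤ f y := by
  rw [min?_eq_foldl] at h
  cases l with
  | nil => simp [List.foldl] at h
  | cons b t =>
    simp only [List.foldl_cons] at h
    rw [show mstep f none b = some b from rfl] at h
    rcases foldl_mstep_some f t b x h with ⟨rfl, hall⟩ | ⟨j, hj, hget, hlt, hfirst, hall⟩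
    · refine ⟨0, by simp, by simp, by omega, ?_⟩
      intro y hy
      rcases List.mem_cons.1 hy with rfl | hy
      · exact le_refl _
      · exact hall y hy
    · refine ⟨j + 1, by simpa using Nat.succ_lt_succ hj, by simpa using hget, ?_, ?_⟩
      · intro i hi hij
        cases i with
        | zero => simpa using hlt
        | succ i => simpa using hfirst i (by simpa using Nat.lt_of_succ_lt_succ hi) (by omega)
      · intro y hy
        rcases List.mem_cons.1 hy with rfl | hy
        · exact le_of_lt hlt
        · exact hall y hy

-- first index of the minimum value in the mapped list picks the min? element
theorem index?_map_min {α : Type} (l : List α) (f : α → Int) (x : α)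
    (h : PySem.List.min? l f = some x) :
    ∃ k, PySem.List.index? (l.map f) (f x) = some k ∧ k < l.length ∧
      ∀ (d : α) (d2 : Int), PySem.List.pyGetD l (k : Int) d = x ∧
        PySem.List.pyGetD (l.map f) (k : Int) d2 = f x := by
  obtain ⟨k, hk, hget, hfirst, _⟩ := min?_first l f x h
  refine ⟨k, ?_, hk, ?_⟩
  · rw [PySem.List.index?_eq_some_iff]
    refine ⟨(l.map f).take k, (l.map f).drop (k + 1), ?_, by simp [hk.le], ?_⟩
    · conv_lhs => rw [← List.take_append_drop k (l.map f)]
      rw [List.drop_eq_getElem_cons (by simpa using hk)]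
      simp [hget]
    · intro hmem
      rw [List.mem_iff_getElem] at hmem
      obtain ⟨i, hi, hx⟩ := hmem
      have hik : i < k := by
        have h2 := hi
        simp only [List.length_take, List.length_map] at h2
        omega
      have hil : i < l.length := by omega
      have htake : ((l.map f).take k)[i] = f l[i] := by
        simp [List.getElem_take]
      rw [htake] at hx
      exact absurd hx ((ne_of_lt (hfirst i hil hik)).symm)
  · intro d d2
    constructor
    · rw [PySem.List.pyGetD_natCast]
      simp [List.getD_eq_getElem?_getD, List.getElem?_eq_getElem hk, hget]
    · rw [PySem.List.pyGetD_natCast]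
      simp [List.getD_eq_getElem?_getD, List.getElem?_eq_getElem hk, hget]

theorem foldl_mstep_keep {α : Type} (f : α → Int) :
    ∀ (t : List α) (m : α), (∀ y ∈ t, ¬ f y < f m) → t.foldl (mstep f) (some m) = some m := by
  intro t
  induction t with
  | nil => intro m _; rfl
  | cons c t ih =>
    intro m h
    rw [List.foldl_cons, show mstep f (some m) c = some m by
      simp [mstep, h c List.mem_cons_self]]
    exact ih m (fun y hy => h y (List.mem_cons_of_mem c hy))

theorem min?_head {α : Type} (f : α → Int) (x : α) (t : List α)
    (h : ∀ y ∈ t, ¬ f y < f x) : PySem.List.min? (x :: t) f = some x := by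
  rw [min?_eq_foldl, List.foldl_cons, show mstep f none x = some x from rfl]
  exact foldl_mstep_keep f t x h

theorem min?_second {α : Type} (f : α → Int) (u x : α) (t : List α)
    (hux : f x < f u) (h : ∀ y ∈ t, ¬ f y < f x) :
    PySem.List.min? (u :: x :: t) f = some x := by
  rw [min?_eq_foldl, List.foldl_cons, List.foldl_cons,
    show mstep f none u = some u from rfl, show mstep f (some u) x = some x by simp [mstep, hux]]
  exact foldl_mstep_keep f t x h

theorem bestNbr_eq (em : List (List Int)) (rows cols i j : Int) :
    bestNbr em rows cols i j =
      PySem.List.min? (find_nbrs i j rows cols) (fun k => cellAt em k.1 k.2) := by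
  unfold bestNbr find_nbrs
  rw [min?_eq_foldl]
  have hfun : (fun (best : Option (Int × Int)) (d : Int × Int) =>
      if 0 ≤ i + d.1 ∧ i + d.1 < rows ∧ 0 ≤ j + d.2 ∧ j + d.2 < cols then
        match best with
        | none => some (i + d.1, j + d.2)
        | some b =>
          if cellAt em (i + d.1) (j + d.2) < cellAt em b.1 b.2 then some (i + d.1, j + d.2) else best
      else best)
      = (fun (best : Option (Int × Int)) (d : Int × Int) =>
      if 0 ≤ i + d.1 ∧ i + d.1 < rows ∧ 0 ≤ j + d.2 ∧ j + d.2 < cols then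
        mstep (fun k => cellAt em k.1 k.2) best (i + d.1, j + d.2)
      else best) := by
    funext best d
    cases best <;> rfl
  rw [hfun]
  simp only [List.zip_cons_cons, List.zip_nil_right, List.filter_cons, List.filter_nil,
    decide_eq_true_eq, List.foldl_cons, List.foldl_nil]
  split_ifs <;> rfl

theorem mem_find_nbrs (i j rows cols : Int) (q : Int × Int)
    (h : q ∈ find_nbrs i j rows cols) :
    (0 ≤ q.1 ∧ q.1 < rows ∧ 0 ≤ q.2 ∧ q.2 < cols) ∧
      ((q.1 = i - 1 ∧ q.2 = j) ∨ (q.1 = i ∧ q.2 = j - 1) ∨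
       (q.1 = i ∧ q.2 = j + 1) ∨ (q.1 = i + 1 ∧ q.2 = j)) := by
  unfold find_nbrs at h
  rw [List.mem_filter] at h
  obtain ⟨hmem, hcond⟩ := h
  simp only [decide_eq_true_eq] at hcond
  refine ⟨hcond, ?_⟩
  simp only [List.zip, List.zipWith, List.mem_cons, List.not_mem_nil, or_false] at hmem
  rcases hmem with rfl | rfl | rfl | rfl <;> simp <;> omega

theorem find_nbrs_explicit (i j row col : Int) :
    find_nbrs i j row col =
      [(i - 1, j), (i, j - 1), (i, j + 1), (i + 1, j)].filter
        (fun p => decide (0 ≤ p.1 ∧ p.1 < row ∧ 0 ≤ p.2 ∧ p.2 < col)) := by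
  unfold find_nbrs
  have h4 : [i + (-1), i + 0, i + 0, i + 1].zip [j + 0, j + (-1), j + 1, j + 0]
      = [(i - 1, j), (i, j - 1), (i, j + 1), (i + 1, j)] := by
    norm_num
    omega
  rw [h4]

theorem find_nbrs_ne_nil (em : List (List Int)) (c : Int × Int)
    (hc : inRC em c) (h11 : ¬(em.length = 1 ∧ CN em = 1)) :
    find_nbrs c.1 c.2 (em.length : Int) (CN em : Int) ≠ [] := by
  obtain ⟨h1, h2, h3, h4⟩ := hc
  by_cases hR : 2 ≤ em.length
  · by_cases hi : c.1 = 0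
    · refine List.ne_nil_of_mem (a := (c.1 + 1, c.2 + 0)) ?_
      unfold find_nbrs
      rw [List.mem_filter]
      constructor
      · simp [List.zip, List.zipWith]
      · simp only [decide_eq_true_eq]
        refine ⟨by omega, by omega, by omega, by omega⟩
    · refine List.ne_nil_of_mem (a := (c.1 + (-1), c.2 + 0)) ?_
      unfold find_nbrs
      rw [List.mem_filter]
      constructor
      · simp [List.zip, List.zipWith]
      · simp only [decide_eq_true_eq]
        refine ⟨by omega, by omega, by omega, by omega⟩
  · have hR1 : em.length = 1 := by omega
    have hC : 2 ≤ CN em := by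
      have : 1 ≤ CN em := by omega
      rcases Nat.lt_or_ge (CN em) 2 with h | h
      · exact absurd ⟨hR1, by omega⟩ h11
      · exact h
    by_cases hj : c.2 = 0
    · refine List.ne_nil_of_mem (a := (c.1 + 0, c.2 + 1)) ?_
      unfold find_nbrs
      rw [List.mem_filter]
      constructor
      · simp [List.zip, List.zipWith]
      · simp only [decide_eq_true_eq]
        refine ⟨by omega, by omega, by omega, by omega⟩
    · refine List.ne_nil_of_mem (a := (c.1 + 0, c.2 + (-1))) ?_
      unfold find_nbrs
      rw [List.mem_filter]
      constructor
      · simp [List.zip, List.zipWith]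
      · simp only [decide_eq_true_eq]
        refine ⟨by omega, by omega, by omega, by omega⟩

theorem bestNbr_some (em : List (List Int)) (c : Int × Int)
    (hc : inRC em c) (h11 : ¬(em.length = 1 ∧ CN em = 1)) :
    ∃ b, bestNbr em (em.length : Int) (CN em : Int) c.1 c.2 = some b := by
  rw [bestNbr_eq]
  cases hmin : PySem.List.min? (find_nbrs c.1 c.2 (em.length : Int) (CN em : Int))
      (fun k => cellAt em k.1 k.2) with
  | none =>
    rw [PySem.List.min?_eq_none_iff] at hmin
    exact absurd hmin (find_nbrs_ne_nil em c hc h11)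
  | some b => exact ⟨b, rfl⟩

-- bridge: the Pre_-side minNbr is the ports' bestNbr
theorem minNbr_eq (em : List (List Int)) (i j : Int) :
    minNbr em i j = bestNbr em (em.length : Int) (CN em : Int) i j := by
  have h1 : bestNbr em (em.length : Int) (CN em : Int) i j
      = ([((-1 : Int), (0 : Int)), (0, -1), (0, 1), (1, 0)].map
          (fun d => (i + d.1, j + d.2))).foldl
          (fun best (p : Int × Int) =>
            if 0 ≤ p.1 ∧ p.1 < (em.length : Int) ∧ 0 ≤ p.2 ∧ p.2 < ((CN em : Nat) : Int) then
              match best with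
              | none => some p
              | some b => if cellAt em p.1 p.2 < cellAt em b.1 b.2 then some p else best
            else best) none := by
    rw [List.foldl_map]
    rfl
  have h2 : ([((-1 : Int), (0 : Int)), (0, -1), (0, 1), (1, 0)].map
      (fun d => (i + d.1, j + d.2)))
      = [(i - 1, j), (i, j - 1), (i, j + 1), (i + 1, j)] := by
    norm_num
    omega
  rw [h1, h2]
  unfold minNbr
  have key : ∀ (l : List (Int × Int)) (acc : Option (Int × Int)),
      (∀ x, acc = some x → inRC em x) →
      l.foldl (fun best p =>
        if 0 ≤ p.1 ∧ p.1 < (em.length : Int) ∧ 0 ≤ p.2 ∧ p.2 < ((em.headD []).length : Int) then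
          match best with
          | none => some p
          | some b =>
            if (em.getD p.1.toNat []).getD p.2.toNat 0 < (em.getD b.1.toNat []).getD b.2.toNat 0
            then some p else best
        else best) acc
      = l.foldl (fun best p =>
        if 0 ≤ p.1 ∧ p.1 < (em.length : Int) ∧ 0 ≤ p.2 ∧ p.2 < ((CN em : Nat) : Int) then
          match best with
          | none => some p
          | some b => if cellAt em p.1 p.2 < cellAt em b.1 b.2 then some p else best
        else best) acc := by
    intro l
    induction l with
    | nil => intro acc _; rfl
    | cons p t ih =>
      intro acc hacc
      rw [List.foldl_cons, List.foldl_cons]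
      have hCN : ((em.headD []).length : Int) = ((CN em : Nat) : Int) := rfl
      by_cases hp : 0 ≤ p.1 ∧ p.1 < (em.length : Int) ∧ 0 ≤ p.2 ∧ p.2 < ((em.headD []).length : Int)
      · have hp' : 0 ≤ p.1 ∧ p.1 < (em.length : Int) ∧ 0 ≤ p.2 ∧ p.2 < ((CN em : Nat) : Int) := hp
        rw [if_pos hp, if_pos hp']
        have hcp : cellAt em p.1 p.2 = (em.getD p.1.toNat []).getD p.2.toNat 0 :=
          cellAt_nat em p.1 p.2 hp.1 hp.2.2.1
        cases hacc2 : acc with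
        | none =>
          exact ih (some p) (by intro x hx; cases hx; exact hp)
        | some b =>
          have hb : inRC em b := hacc b hacc2
          have hcb : cellAt em b.1 b.2 = (em.getD b.1.toNat []).getD b.2.toNat 0 :=
            cellAt_nat em b.1 b.2 hb.1 hb.2.2.1
          simp only [hcp, hcb]
          split
          · exact ih (some p) (by intro x hx; cases hx; exact hp)
          · exact ih (some b) (by intro x hx; cases hx; exact hb)
      · have hp' : ¬(0 ≤ p.1 ∧ p.1 < (em.length : Int) ∧ 0 ≤ p.2 ∧ p.2 < ((CN em : Nat) : Int)) := hp
        rw [if_neg hp, if_neg hp']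
        exact ih acc hacc
  exact key _ none (by intro x hx; cases hx)

-- the flow-step function both programs follow
def stepS (em : List (List Int)) (c : Int × Int) : Option (Int × Int) :=
  match bestNbr em (em.length : Int) (CN em : Int) c.1 c.2 with
  | none => none
  | some b => if cellAt em b.1 b.2 > cellAt em c.1 c.2 then none else some b

theorem stepS_eq_none_of_bnone (em : List (List Int)) (c : Int × Int)
    (hb : bestNbr em (em.length : Int) (CN em : Int) c.1 c.2 = none) : stepS em c = none := by
  unfold stepS
  rw [hb]

theorem stepS_eq_none_of_gt (em : List (List Int)) (c b : Int × Int)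
    (hb : bestNbr em (em.length : Int) (CN em : Int) c.1 c.2 = some b)
    (hgt : cellAt em b.1 b.2 > cellAt em c.1 c.2) : stepS em c = none := by
  unfold stepS
  rw [hb]
  simp [hgt]

theorem stepS_eq_some_of_le (em : List (List Int)) (c b : Int × Int)
    (hb : bestNbr em (em.length : Int) (CN em : Int) c.1 c.2 = some b)
    (hgt : ¬ cellAt em b.1 b.2 > cellAt em c.1 c.2) : stepS em c = some b := by
  unfold stepS
  rw [hb]
  simp [hgt]

theorem step_parts (em : List (List Int)) (c b : Int × Int) (h : stepS em c = some b) :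
    bestNbr em (em.length : Int) (CN em : Int) c.1 c.2 = some b ∧
      cellAt em b.1 b.2 ≤ cellAt em c.1 c.2 := by
  cases hb : bestNbr em (em.length : Int) (CN em : Int) c.1 c.2 with
  | none => rw [stepS_eq_none_of_bnone em c hb] at h; cases h
  | some b' =>
    by_cases hgt : cellAt em b'.1 b'.2 > cellAt em c.1 c.2
    · rw [stepS_eq_none_of_gt em c b' hb hgt] at h; cases h
    · rw [stepS_eq_some_of_le em c b' hb hgt] at h
      have hbb : b' = b := Option.some.inj h
      subst hbb
      exact ⟨rfl, by omega⟩

theorem step_some (em : List (List Int)) (c b : Int × Int) (h : stepS em c = some b) :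
    inRC em b ∧ cellAt em b.1 b.2 ≤ cellAt em c.1 c.2 ∧
      ((b.1 = c.1 - 1 ∧ b.2 = c.2) ∨ (b.1 = c.1 ∧ b.2 = c.2 - 1) ∨
       (b.1 = c.1 ∧ b.2 = c.2 + 1) ∨ (b.1 = c.1 + 1 ∧ b.2 = c.2)) ∧
      (∀ z ∈ find_nbrs c.1 c.2 (em.length : Int) (CN em : Int),
        cellAt em b.1 b.2 ≤ cellAt em z.1 z.2) := by
  obtain ⟨hb, hle⟩ := step_parts em c b h
  rw [bestNbr_eq] at hb
  have hmem := PySem.List.min?_mem hb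
  have hfn := mem_find_nbrs _ _ _ _ _ hmem
  exact ⟨hfn.1, hle, hfn.2, fun z hz => PySem.List.min?_isMin hb z hz⟩

-- iterated step (head recursion)
def iterS (em : List (List Int)) : Nat → (Int × Int) → Option (Int × Int)
  | 0, c => some c
  | n + 1, c => (stepS em c).bind (iterS em n)

theorem iter_add (em : List (List Int)) :
    ∀ (m n : Nat) (c : Int × Int),
      iterS em (m + n) c = (iterS em m c).bind (iterS em n) := by
  intro m
  induction m with
  | zero => intro n c; simp [iterS]
  | succ m ih =>
    intro n c
    rw [show m + 1 + n = (m + n) + 1 from by omega]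
    show (stepS em c).bind (iterS em (m + n)) = ((stepS em c).bind (iterS em m)).bind (iterS em n)
    cases stepS em c with
    | none => rfl
    | some b => simpa using ih n b

theorem iter_succ_right (em : List (List Int)) (n : Nat) (c : Int × Int) :
    iterS em (n + 1) c = (iterS em n c).bind (stepS em) := by
  rw [iter_add em n 1 c]
  cases iterS em n c with
  | none => rfl
  | some d =>
    show iterS em 1 d = stepS em d
    show (stepS em d).bind (iterS em 0) = stepS em d
    cases stepS em d <;> rfl

theorem iter_isSome_of_le (em : List (List Int)) (p k : Nat) (c x : Int × Int)
    (hk : k ≤ p) (h : iterS em p c = some x) : ∃ y, iterS em k c = some y := by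
  rw [show p = k + (p - k) from by omega, iter_add] at h
  cases hy : iterS em k c with
  | none => rw [hy] at h; cases h
  | some y => exact ⟨y, rfl⟩

theorem iter_inRC (em : List (List Int)) :
    ∀ (k : Nat) (c x : Int × Int), inRC em c → iterS em k c = some x → inRC em x := by
  intro k
  induction k with
  | zero => intro c x hc h; cases h; exact hc
  | succ k ih =>
    intro c x hc h
    unfold iterS at h
    cases hs : stepS em c with
    | none => rw [hs] at h; cases h
    | some b =>
      rw [hs] at h
      exact ih b x (step_some em c b hs).1 h

theorem iter_val_le (em : List (List Int)) :
    ∀ (k : Nat) (c x : Int × Int), iterS em k c = some x →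
      cellAt em x.1 x.2 ≤ cellAt em c.1 c.2 := by
  intro k
  induction k with
  | zero => intro c x h; cases h; exact le_refl _
  | succ k ih =>
    intro c x h
    unfold iterS at h
    cases hs : stepS em c with
    | none => rw [hs] at h; cases h
    | some b =>
      rw [hs] at h
      exact le_trans (ih b x h) (step_some em c b hs).2.1

-- chosen-neighbour lemmas: the first minimal neighbour wins
theorem chosen_U (em : List (List Int)) (i j : Int)
    (hcell : inRC em (i, j)) (hUr : 1 ≤ i)
    (hmin : ∀ z ∈ find_nbrs i j (em.length : Int) (CN em : Int),
      cellAt em (i - 1) j ≤ cellAt em z.1 z.2) :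
    bestNbr em (em.length : Int) (CN em : Int) i j = some (i - 1, j) := by
  obtain ⟨h1, h2, h3, h4⟩ := hcell
  rw [bestNbr_eq]
  have hexp := find_nbrs_explicit i j (em.length : Int) (CN em : Int)
  rw [hexp]
  rw [List.filter_cons, if_pos (by simp only [decide_eq_true_eq]; refine ⟨by omega, by omega, by omega, by omega⟩)]
  apply min?_head
  intro y hy
  have hyfn : y ∈ find_nbrs i j (em.length : Int) (CN em : Int) := by
    rw [hexp, List.filter_cons,
      if_pos (by simp only [decide_eq_true_eq]; refine ⟨by omega, by omega, by omega, by omega⟩)]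
    exact List.mem_cons_of_mem _ hy
  have hz := hmin y hyfn
  dsimp only
  omega

theorem chosen_L (em : List (List Int)) (i j : Int)
    (hcell : inRC em (i, j)) (hLr : 1 ≤ j)
    (hU : i < 1 ∨ cellAt em i (j - 1) < cellAt em (i - 1) j)
    (hmin : ∀ z ∈ find_nbrs i j (em.length : Int) (CN em : Int),
      cellAt em i (j - 1) ≤ cellAt em z.1 z.2) :
    bestNbr em (em.length : Int) (CN em : Int) i j = some (i, j - 1) := by
  obtain ⟨h1, h2, h3, h4⟩ := hcell
  rw [bestNbr_eq]
  have hexp := find_nbrs_explicit i j (em.length : Int) (CN em : Int)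
  rw [hexp]
  have hkeep : ∀ y ∈ [(i, j + 1), (i + 1, j)].filter
      (fun p => decide (0 ≤ p.1 ∧ p.1 < (em.length : Int) ∧ 0 ≤ p.2 ∧ p.2 < ((CN em : Nat) : Int))),
      ¬ (fun k : Int × Int => cellAt em k.1 k.2) y < (fun k : Int × Int => cellAt em k.1 k.2) (i, j - 1) := by
    intro y hy
    have hmemy : y ∈ [(i, j + 1), (i + 1, j)] := List.mem_of_mem_filter hy
    have hcnd := List.of_mem_filter hy
    have hyfn : y ∈ find_nbrs i j (em.length : Int) (CN em : Int) := by
      rw [hexp]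
      refine List.mem_filter.2 ⟨?_, hcnd⟩
      simp only [List.mem_cons, List.not_mem_nil, or_false] at hmemy ⊢
      tauto
    have hz := hmin y hyfn
    dsimp only
    omega
  by_cases hUin : 1 ≤ i
  · have hUv : cellAt em i (j - 1) < cellAt em (i - 1) j := hU.resolve_left (by omega)
    rw [List.filter_cons, if_pos (by simp only [decide_eq_true_eq]; refine ⟨by omega, by omega, by omega, by omega⟩)]
    rw [List.filter_cons, if_pos (by simp only [decide_eq_true_eq]; refine ⟨by omega, by omega, by omega, by omega⟩)]
    exact min?_second _ _ _ _ hUv hkeep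
  · rw [List.filter_cons, if_neg (by simp only [decide_eq_true_eq]; omega)]
    rw [List.filter_cons, if_pos (by simp only [decide_eq_true_eq]; refine ⟨by omega, by omega, by omega, by omega⟩)]
    exact min?_head _ _ _ hkeep

-- no step-cycle exists under Pre_
theorem pre_noPair (em : List (List Int)) (hpre : Pre2 em) (c b : Int × Int)
    (hc : inRC em c) (h1 : stepS em c = some b) (h2 : stepS em b = some c) : False := by
  have hb : inRC em b := (step_some em c b h1).1
  have hv1 : cellAt em b.1 b.2 ≤ cellAt em c.1 c.2 := (step_parts em c b h1).2
  have hv2 : cellAt em c.1 c.2 ≤ cellAt em b.1 b.2 := (step_parts em b c h2).2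
  have hbn1 := (step_parts em c b h1).1
  have hbn2 := (step_parts em b c h2).1
  obtain ⟨hc1, hc2, hc3, hc4⟩ := hc
  obtain ⟨hb1, hb2, hb3, hb4⟩ := hb
  have hCN : CN em = (em.headD []).length := rfl
  have hmn1 : minNbr em ((c.1.toNat : Nat) : Int) ((c.2.toNat : Nat) : Int) = some b := by
    rw [show ((c.1.toNat : Nat) : Int) = c.1 by omega, show ((c.2.toNat : Nat) : Int) = c.2 by omega]
    rw [minNbr_eq]
    exact hbn1
  have hP := hpre.2.2 c.1.toNat (by omega) c.2.toNat (by omega) b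
    (by rw [Option.mem_def]; exact hmn1)
  apply hP
  constructor
  · rw [minNbr_eq, hbn2]
    congr 1
    apply Prod.ext <;> simp <;> omega
  · have e1 := cellAt_nat em c.1 c.2 hc1 hc3
    have e2 := cellAt_nat em b.1 b.2 hb1 hb3
    unfold natCell at e1 e2
    omega

theorem no_cycle (em : List (List Int)) (hpre : Pre2 em) :
    ∀ (c : Int × Int) (p : Nat), inRC em c → 0 < p → iterS em p c = some c → False := by
  intro c p hc hp hcyc
  set S : List (Int × Int) := (List.range p).filterMap (fun k => iterS em k c) with hS
  have mem_S : ∀ x, x ∈ S ↔ ∃ k, k < p ∧ iterS em k c = some x := by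
    intro x
    rw [hS, List.mem_filterMap]
    constructor
    · rintro ⟨k, hk, h⟩; exact ⟨k, by simpa using hk, h⟩
    · rintro ⟨k, hk, h⟩; exact ⟨k, by simpa using hk, h⟩
  have hcS : c ∈ S := (mem_S c).2 ⟨0, hp, rfl⟩
  have hinS : ∀ x ∈ S, inRC em x := by
    intro x hx
    obtain ⟨k, _, h⟩ := (mem_S x).1 hx
    exact iter_inRC em k c x hc h
  have hvalS : ∀ x ∈ S, cellAt em x.1 x.2 = cellAt em c.1 c.2 := by
    intro x hx
    obtain ⟨k, hk, h⟩ := (mem_S x).1 hx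
    have h1 : cellAt em x.1 x.2 ≤ cellAt em c.1 c.2 := iter_val_le em k c x h
    have h2 : cellAt em c.1 c.2 ≤ cellAt em x.1 x.2 := by
      have hrest : iterS em (p - k) x = some c := by
        have := hcyc
        rw [show p = k + (p - k) from by omega, iter_add, h] at this
        simpa using this
      exact iter_val_le em (p - k) x c hrest
    omega
  have hclose : ∀ x ∈ S, ∃ y ∈ S, stepS em x = some y := by
    intro x hx
    obtain ⟨k, hk, h⟩ := (mem_S x).1 hx
    have hk1 : iterS em (k + 1) c = (stepS em x) := by
      rw [iter_succ_right, h]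
      rfl
    obtain ⟨y, hy⟩ := iter_isSome_of_le em p (k + 1) c c (by omega) hcyc
    refine ⟨y, ?_, by rw [← hk1, hy]⟩
    by_cases hkp : k + 1 < p
    · exact (mem_S y).2 ⟨k + 1, hkp, hy⟩
    · have : k + 1 = p := by omega
      rw [this, hcyc] at hy
      cases hy
      exact hcS
  -- lexicographic key
  have hCpos : (0 : Int) < (CN em : Int) := lt_of_le_of_lt (hc.2.2.1) (hc.2.2.2)
  cases hmin : PySem.List.min? S (fun x => x.1 * (CN em : Int) + x.2) with
  | none =>
    rw [PySem.List.min?_eq_none_iff] at hmin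
    rw [hmin] at hcS
    cases hcS
  | some m =>
    have hmS : m ∈ S := PySem.List.min?_mem hmin
    have hmin' := PySem.List.min?_isMin hmin
    have hmR : inRC em m := hinS m hmS
    obtain ⟨b, hbS, hstep⟩ := hclose m hmS
    obtain ⟨hbR, hble, hadj, hall⟩ := step_some em m b hstep
    have hKb := hmin' b hbS
    have hvb : cellAt em b.1 b.2 = cellAt em m.1 m.2 := by
      rw [hvalS b hbS, hvalS m hmS]
    obtain ⟨hm1, hm2, hm3, hm4⟩ := hmR
    obtain ⟨hb1, hb2, hb3, hb4⟩ := hbR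
    -- b is a neighbour of m with key ≥ key m: only right or down possible
    rcases hadj with ⟨e1, e2⟩ | ⟨e1, e2⟩ | ⟨e1, e2⟩ | ⟨e1, e2⟩
    · -- up: key decreases by C
      have : b.1 * (CN em : Int) + b.2 = m.1 * (CN em : Int) + m.2 - (CN em : Int) := by
        rw [e1, e2]; ring
      omega
    · -- left: key decreases by 1
      have : b.1 * (CN em : Int) + b.2 = m.1 * (CN em : Int) + m.2 - 1 := by
        rw [e1, e2]; ring
      omega
    · -- right: b = (m.1, m.2 + 1)
      have hC2 : (2 : Int) ≤ (CN em : Int) := by omega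
      obtain ⟨b', hb'S, hstep'⟩ := hclose b hbS
      have hall' := (step_some em b b' hstep').2.2.2
      have hvb' : cellAt em b'.1 b'.2 = cellAt em m.1 m.2 := by
        rw [hvalS b' hb'S, hvalS m hmS]
      by_cases hUb : 1 ≤ b.1 ∧ cellAt em (b.1 - 1) b.2 ≤ cellAt em b'.1 b'.2
      · -- b would step up, to a cell with smaller key than m
        have hch : bestNbr em (em.length : Int) (CN em : Int) b.1 b.2 = some (b.1 - 1, b.2) := by
          apply chosen_U em b.1 b.2 ⟨hb1, hb2, hb3, hb4⟩ hUb.1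
          intro z hz
          exact le_trans hUb.2 (hall' z hz)
        have hb'eq : b' = (b.1 - 1, b.2) := by
          have := (step_parts em b b' hstep').1
          rw [hch] at this
          exact Option.some.inj this.symm
        have hKb' := hmin' b' hb'S
        rw [hb'eq] at hKb'
        simp only at hKb'
        have : (b.1 - 1) * (CN em : Int) + b.2 = m.1 * (CN em : Int) + m.2 + 1 - (CN em : Int) := by
          rw [e1, e2]; ring
        omega
      · -- b steps back to m: mutual pair
        have hmval : cellAt em b.1 (b.2 - 1) = cellAt em m.1 m.2 := by
          rw [e1, e2]
          norm_num
        have hch : bestNbr em (em.length : Int) (CN em : Int) b.1 b.2 = some (b.1, b.2 - 1) := by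
          -- left neighbour of b is m
          apply chosen_L em b.1 b.2 ⟨hb1, hb2, hb3, hb4⟩ (by omega)
          · rcases not_and_or.1 hUb with h | h
            · left
              omega
            · right
              omega
          · intro z hz
            rw [hmval, ← hvb']
            exact hall' z hz
        have hchm : bestNbr em (em.length : Int) (CN em : Int) b.1 b.2 = some m := by
          rw [hch]
          congr 1
          apply Prod.ext <;> simp <;> omega
        have hstepb : stepS em b = some m :=
          stepS_eq_some_of_le em b m hchm (by omega)
        exact pre_noPair em hpre m b ⟨hm1, hm2, hm3, hm4⟩ hstep hstepb
    · -- down: b = (m.1 + 1, m.2); b's up neighbour is m, so b steps back: mutual pair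
      obtain ⟨b', hb'S, hstep'⟩ := hclose b hbS
      have hall' := (step_some em b b' hstep').2.2.2
      have hvb' : cellAt em b'.1 b'.2 = cellAt em m.1 m.2 := by
        rw [hvalS b' hb'S, hvalS m hmS]
      have hmval : cellAt em (b.1 - 1) b.2 = cellAt em m.1 m.2 := by
        rw [e1, e2]
        norm_num
      have hch : bestNbr em (em.length : Int) (CN em : Int) b.1 b.2 = some (b.1 - 1, b.2) := by
        apply chosen_U em b.1 b.2 ⟨hb1, hb2, hb3, hb4⟩ (by omega)
        intro z hz
        rw [hmval, ← hvb']
        exact hall' z hz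
      have hchm : bestNbr em (em.length : Int) (CN em : Int) b.1 b.2 = some m := by
        rw [hch]
        congr 1
        apply Prod.ext <;> simp <;> omega
      have hstepb : stepS em b = some m :=
        stepS_eq_some_of_le em b m hchm (by omega)
      exact pre_noPair em hpre m b ⟨hm1, hm2, hm3, hm4⟩ hstep hstepb

-- the walk from c terminates within n steps
def TermLe (em : List (List Int)) (c : Int × Int) (n : Nat) : Prop :=
  ∃ k, k ≤ n ∧ ∃ d, iterS em k c = some d ∧ stepS em d = none

theorem termle_zero (em : List (List Int)) (c : Int × Int) (h : TermLe em c 0) :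
    stepS em c = none := by
  obtain ⟨k, hk, d, hiter, hnone⟩ := h
  have : k = 0 := by omega
  subst this
  cases hiter
  exact hnone

theorem termle_shift (em : List (List Int)) (c b : Int × Int) (n : Nat)
    (h : TermLe em c (n + 1)) (hs : stepS em c = some b) : TermLe em b n := by
  obtain ⟨k, hk, d, hiter, hnone⟩ := h
  cases k with
  | zero =>
    cases hiter
    rw [hs] at hnone
    cases hnone
  | succ k =>
    refine ⟨k, by omega, d, ?_, hnone⟩
    unfold iterS at hiter
    rw [hs] at hiter
    simpa using hiter

theorem termle_pos (em : List (List Int)) (c b : Int × Int) (n : Nat)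
    (h : TermLe em c n) (hs : stepS em c = some b) : 1 ≤ n := by
  cases n with
  | zero => rw [termle_zero em c h] at hs; cases hs
  | succ n => omega

theorem key_mono (a b j C : Nat) (hj : j < C) (hab : a < b) : a * C + j < b * C := by
  have h1 : a * C + j < a * C + C := by omega
  have h2 : a * C + C = (a + 1) * C := by ring
  have h3 : (a + 1) * C ≤ b * C := Nat.mul_le_mul (by omega) (le_refl C)
  omega

theorem key_bound (em : List (List Int)) (x : Int × Int) (hx : inRC em x) :
    x.1.toNat * CN em + x.2.toNat < em.length * CN em := by
  obtain ⟨h1, h2, h3, h4⟩ := hx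
  exact key_mono x.1.toNat em.length x.2.toNat (CN em) (by omega) (by omega)

theorem key_inj (em : List (List Int)) (x y : Int × Int) (hx : inRC em x) (hy : inRC em y)
    (h : x.1.toNat * CN em + x.2.toNat = y.1.toNat * CN em + y.2.toNat) : x = y := by
  obtain ⟨a1, a2, a3, a4⟩ := hx
  obtain ⟨b1, b2, b3, b4⟩ := hy
  have hjx : x.2.toNat < CN em := by omega
  have hjy : y.2.toNat < CN em := by omega
  have h1 : x.1.toNat = y.1.toNat := by
    rcases Nat.lt_trichotomy x.1.toNat y.1.toNat with hlt | heq | hlt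
    · have := key_mono x.1.toNat y.1.toNat x.2.toNat (CN em) hjx hlt
      omega
    · exact heq
    · have := key_mono y.1.toNat x.1.toNat y.2.toNat (CN em) hjy hlt
      omega
  have h2 : x.2.toNat = y.2.toNat := by
    rw [h1] at h
    omega
  apply Prod.ext <;> omega

theorem terminates (em : List (List Int)) (hpre : Pre2 em) (c : Int × Int) (hc : inRC em c) :
    TermLe em c (em.length * CN em) := by
  by_contra hterm
  have hnostop : ∀ k ≤ em.length * CN em, ∀ d, iterS em k c = some d → stepS em d ≠ none := by
    intro k hk d hiter hnone
    exact hterm ⟨k, hk, d, hiter, hnone⟩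
  have hdef : ∀ k ≤ em.length * CN em + 1, ∃ x, iterS em k c = some x ∧ inRC em x := by
    intro k
    induction k with
    | zero => intro _; exact ⟨c, rfl, hc⟩
    | succ k ih =>
      intro hk
      obtain ⟨x, hx, hxR⟩ := ih (by omega)
      cases hs : stepS em x with
      | none => exact absurd hs (hnostop k (by omega) x hx)
      | some b =>
        refine ⟨b, ?_, (step_some em x b hs).1⟩
        rw [iter_succ_right, hx]
        simpa using hs
  set N := em.length * CN em with hN
  let xk : Nat → Int × Int := fun k => (iterS em k c).getD (0, 0)
  have hxk : ∀ k ≤ N + 1, iterS em k c = some (xk k) ∧ inRC em (xk k) := by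
    intro k hk
    obtain ⟨x, hx, hxR⟩ := hdef k hk
    constructor
    · show iterS em k c = some ((iterS em k c).getD (0, 0))
      rw [hx]
      rfl
    · show inRC em ((iterS em k c).getD (0, 0))
      rw [hx]
      exact hxR
  have hdist : ∀ k1 k2 : Nat, k1 < k2 → k2 ≤ N + 1 → xk k1 ≠ xk k2 := by
    intro k1 k2 hlt hle heq
    obtain ⟨h1, hR1⟩ := hxk k1 (by omega)
    obtain ⟨h2, _⟩ := hxk k2 hle
    have hcyc : iterS em (k2 - k1) (xk k1) = some (xk k1) := by
      have hh := h2
      rw [show k2 = k1 + (k2 - k1) from by omega, iter_add, h1] at hh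
      rw [show iterS em (k2 - k1) (xk k1) = (some (xk k1)).bind (iterS em (k2 - k1)) from rfl,
        hh, heq, show k1 + (k2 - k1) = k2 from by omega]
    exact no_cycle em hpre (xk k1) (k2 - k1) hR1 (by omega) hcyc
  -- pigeonhole on keys
  have hNpos : 0 < N := by
    obtain ⟨_, hR⟩ := hxk 0 (by omega)
    have := key_bound em (xk 0) hR
    omega
  let g : Fin (N + 2) → Fin N := fun k =>
    ⟨(xk k).1.toNat * CN em + (xk k).2.toNat, by
      have := key_bound em (xk k) (hxk k (by omega)).2
      omega⟩
  have hginj : Function.Injective g := by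
    intro k1 k2 hg
    have hv : (xk k1).1.toNat * CN em + (xk k1).2.toNat
        = (xk k2).1.toNat * CN em + (xk k2).2.toNat := congrArg Fin.val hg
    have hxeq : xk k1 = xk k2 :=
      key_inj em _ _ (hxk k1 (by omega)).2 (hxk k2 (by omega)).2 hv
    rcases Nat.lt_trichotomy k1.val k2.val with hlt | heq | hlt
    · exact absurd hxeq (hdist k1 k2 hlt (by omega))
    · exact Fin.ext heq
    · exact absurd hxeq.symm (hdist k2 k1 hlt (by omega))
  have := Fintype.card_le_of_injective g hginj
  simp only [Fintype.card_fin] at this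
  omega

-- the common sink function
def sinkF (fuel : Nat) (em : List (List Int)) (c : Int × Int) : Int × Int :=
  match fuel with
  | 0 => c
  | fuel + 1 =>
    match stepS em c with
    | none => c
    | some b => sinkF fuel em b

def Sf (em : List (List Int)) (c : Int × Int) : Int × Int :=
  sinkF (em.length * CN em + 2) em c

theorem sinkF_congr (em : List (List Int)) :
    ∀ (n : Nat) (c : Int × Int) (f1 f2 : Nat), TermLe em c n → n < f1 → n < f2 →
      sinkF f1 em c = sinkF f2 em c := by
  intro n
  induction n with
  | zero =>
    intro c f1 f2 ht h1 h2
    have hs := termle_zero em c ht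
    obtain ⟨f1, rfl⟩ : ∃ g, f1 = g + 1 := ⟨f1 - 1, by omega⟩
    obtain ⟨f2, rfl⟩ : ∃ g, f2 = g + 1 := ⟨f2 - 1, by omega⟩
    unfold sinkF
    rw [hs]
  | succ n ih =>
    intro c f1 f2 ht h1 h2
    obtain ⟨f1, rfl⟩ : ∃ g, f1 = g + 1 := ⟨f1 - 1, by omega⟩
    obtain ⟨f2, rfl⟩ : ∃ g, f2 = g + 1 := ⟨f2 - 1, by omega⟩
    unfold sinkF
    cases hs : stepS em c with
    | none => rfl
    | some b => exact ih b f1 f2 (termle_shift em c b n ht hs) (by omega) (by omega)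

theorem Sf_step_none (em : List (List Int)) (c : Int × Int) (hs : stepS em c = none) :
    Sf em c = c := by
  unfold Sf
  rw [show em.length * CN em + 2 = (em.length * CN em + 1) + 1 from rfl]
  unfold sinkF
  rw [hs]

theorem Sf_step_some (em : List (List Int)) (hpre : Pre2 em)
    (c b : Int × Int) (hs : stepS em c = some b) :
    Sf em c = Sf em b := by
  have hbR : inRC em b := (step_some em c b hs).1
  have htb : TermLe em b (em.length * CN em) := terminates em hpre b hbR
  unfold Sf
  conv_lhs => rw [show em.length * CN em + 2 = (em.length * CN em + 1) + 1 from rfl]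
  unfold sinkF
  rw [hs]
  exact sinkF_congr em (em.length * CN em) b (em.length * CN em + 1) (em.length * CN em + 2)
    htb (by omega) (by omega)

theorem getD0_append {α : Type} (xs ys : List α) (d : α) (h : xs ≠ []) :
    (xs ++ ys).getD 0 d = xs.getD 0 d := by
  cases xs with
  | nil => exact absurd rfl h
  | cons a t => simp

theorem fal_unfold (em : List (List Int))
    (fuel : Nat) (ci cj bi bj : Int)
    (hb0 : bestNbr em (em.length : Int) ((CN em : Nat) : Int) ci cj = some (bi, bj)) :
    find_and_label (fuel + 1) em ci cj =
      if cellAt em bi bj > cellAt em ci cj then [(ci, cj)]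
      else find_and_label fuel em bi bj ++ [(ci, cj)] := by
  have hb := hb0
  rw [bestNbr_eq] at hb
  obtain ⟨k, hidx, hklt, hget⟩ := index?_map_min _ _ _ hb
  obtain ⟨hget1, hget2⟩ := hget (0, 0) 0
  have hm : PySem.List.min?
      ((find_nbrs ci cj (em.length : Int) ((CN em : Nat) : Int)).map (fun kk => cellAt em kk.1 kk.2))
      (fun x => x) = some (cellAt em bi bj) := by
    rw [min?_map_id, hb]; rfl
  simp only [find_and_label]
  rw [show ((PySem.List.pyGetD em 0 []).length : Nat) = CN em from congrArg List.length (head_pyGetD em)]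
  rw [hm]
  simp only [Option.getD_some]
  rw [hidx]
  simp only [Option.getD_some]
  rw [hget2, hget1]

theorem fal_eq (em : List (List Int)) (hpre : Pre2 em) :
    ∀ (n : Nat) (fuel : Nat) (ci cj : Int), inRC em (ci, cj) → TermLe em (ci, cj) n → n < fuel →
      find_and_label fuel em ci cj ≠ [] ∧
      PySem.List.pyGetD (find_and_label fuel em ci cj) 0 (0, 0) = Sf em (ci, cj) ∧
      (ci, cj) ∈ find_and_label fuel em ci cj ∧
      ∀ e ∈ find_and_label fuel em ci cj, inRC em e ∧ Sf em e = Sf em (ci, cj) := by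
  intro n
  induction n with
  | zero =>
    intro fuel ci cj hc ht hf
    have hs := termle_zero em (ci, cj) ht
    obtain ⟨b, hb0⟩ := bestNbr_some em (ci, cj) hc hpre.2.1
    obtain ⟨bi, bj⟩ := b
    have hgt : cellAt em bi bj > cellAt em ci cj := by
      by_contra h
      rw [stepS_eq_some_of_le em (ci, cj) (bi, bj) hb0 h] at hs
      cases hs
    obtain ⟨fuel, rfl⟩ : ∃ g, fuel = g + 1 := ⟨fuel - 1, by omega⟩
    rw [fal_unfold em fuel ci cj bi bj hb0, if_pos hgt]
    have hS : Sf em (ci, cj) = (ci, cj) := Sf_step_none em (ci, cj) hs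
    refine ⟨by simp, by simp [PySem.List.pyGetD_zero, hS], by simp, ?_⟩
    intro e he
    simp at he
    subst he
    exact ⟨hc, rfl⟩
  | succ n ih =>
    intro fuel ci cj hc ht hf
    obtain ⟨b, hb0⟩ := bestNbr_some em (ci, cj) hc hpre.2.1
    obtain ⟨bi, bj⟩ := b
    obtain ⟨fuel, rfl⟩ : ∃ g, fuel = g + 1 := ⟨fuel - 1, by omega⟩
    rw [fal_unfold em fuel ci cj bi bj hb0]
    by_cases hgt : cellAt em bi bj > cellAt em ci cj
    · -- sink cell
      have hstep : stepS em (ci, cj) = none :=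
        stepS_eq_none_of_gt em (ci, cj) (bi, bj) hb0 hgt
      have hS : Sf em (ci, cj) = (ci, cj) := Sf_step_none em (ci, cj) hstep
      rw [if_pos hgt]
      refine ⟨by simp, by simp [PySem.List.pyGetD_zero, hS], by simp, ?_⟩
      intro e he
      simp at he
      subst he
      exact ⟨hc, rfl⟩
    · have hstep : stepS em (ci, cj) = some (bi, bj) :=
        stepS_eq_some_of_le em (ci, cj) (bi, bj) hb0 hgt
      have hbin : inRC em (bi, bj) := (step_some em _ _ hstep).1
      have hSf : Sf em (ci, cj) = Sf em (bi, bj) :=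
        Sf_step_some em hpre (ci, cj) (bi, bj) hstep
      obtain ⟨hne, hhead, hmem, hall⟩ := ih fuel bi bj hbin
        (termle_shift em (ci, cj) (bi, bj) n ht hstep) (by omega)
      rw [if_neg hgt]
      refine ⟨by simp, ?_, by simp, ?_⟩
      · rw [PySem.List.pyGetD_zero, getD0_append _ _ _ hne, ← PySem.List.pyGetD_zero, hhead, hSf]
      · intro e he
        rw [List.mem_append] at he
        rcases he with he | he
        · obtain ⟨h1, h2⟩ := hall e he
          exact ⟨h1, by rw [h2, hSf]⟩
        · simp at he
          subst he
          exact ⟨hc, rfl⟩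

-- reference dictionary: first-appearance labelling of sinks
def refStep (em : List (List Int)) (d : PySem.Dict (Int × Int) String) (c : Int × Int) :
    PySem.Dict (Int × Int) String :=
  if (d.get? (Sf em c)).isSome then d else d.insert (Sf em c) (pyChr (97 + (d.size : Int)))

def refDict (em : List (List Int)) (P : List (Int × Int)) : PySem.Dict (Int × Int) String :=
  P.foldl (refStep em) PySem.Dict.empty

def cellsL (em : List (List Int)) : List (Int × Int) :=
  (PySem.List.pyRange 0 (em.length : Int) 1).flatMap
    (fun i => (PySem.List.pyRange 0 ((CN em : Nat) : Int) 1).map (fun j => (i, j)))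

def refOut (em : List (List Int)) : List (List String) :=
  (PySem.List.pyRange 0 (em.length : Int) 1).map (fun i =>
    (PySem.List.pyRange 0 ((CN em : Nat) : Int) 1).map (fun j =>
      (refDict em (cellsL em)).getD (Sf em (i, j)) ""))

theorem refStep_preserve (em : List (List Int)) (d : PySem.Dict (Int × Int) String)
    (c : Int × Int) (k : Int × Int) (v : String) (h : d.get? k = some v) :
    (refStep em d c).get? k = some v := by
  unfold refStep
  split
  · exact h
  · next hnot =>
    rw [PySem.Dict.get?_insert]
    split
    · next hk => rw [hk] at h; rw [h] at hnot; simp at hnot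
    · exact h

theorem refStep_self (em : List (List Int)) (d : PySem.Dict (Int × Int) String) (c : Int × Int) :
    ((refStep em d c).get? (Sf em c)).isSome := by
  unfold refStep
  split
  · assumption
  · rw [PySem.Dict.get?_insert]
    simp

theorem refDict_snoc (em : List (List Int)) (P : List (Int × Int)) (c : Int × Int) :
    refDict em (P ++ [c]) = refStep em (refDict em P) c := by
  unfold refDict
  rw [List.foldl_append]
  rfl

theorem refDict_stable (em : List (List Int)) (P Q : List (Int × Int)) (k : Int × Int) (v : String)
    (h : (refDict em P).get? k = some v) : (refDict em (P ++ Q)).get? k = some v := by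
  induction Q using List.reverseRecOn with
  | nil => simpa using h
  | append_singleton Q c ih =>
    rw [← List.append_assoc, refDict_snoc]
    exact refStep_preserve em _ c k v ih

-- sinkmap matrix machinery
def dimsA (em : List (List Int)) (sm : List (List (Option (Int × Int)))) : Prop :=
  sm.length = em.length ∧ ∀ i < em.length, (sm.getD i []).length = CN em

def entry (sm : List (List (Option (Int × Int)))) (i j : Nat) : Option (Int × Int) :=
  (sm.getD i []).getD j none

theorem entry_pyGetD (sm : List (List (Option (Int × Int)))) (i j : Int)
    (hi : 0 ≤ i) (hj : 0 ≤ j) :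
    PySem.List.pyGetD (PySem.List.pyGetD sm i []) j none = entry sm i.toNat j.toNat := by
  unfold entry
  rw [show i = ((i.toNat : Nat) : Int) by omega, show j = ((j.toNat : Nat) : Int) by omega]
  rw [PySem.List.pyGetD_natCast, PySem.List.pyGetD_natCast]
  simp [max_eq_left hi, max_eq_left hj]

def smSet (sm : List (List (Option (Int × Int)))) (e : Int × Int) (v : Option (Int × Int)) :
    List (List (Option (Int × Int))) :=
  PySem.List.pySetD sm e.1 (PySem.List.pySetD (PySem.List.pyGetD sm e.1 []) e.2 v)

theorem pyGetD_toNat {α : Type} (xs : List α) (i : Int) (d : α) (hi : 0 ≤ i) :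
    PySem.List.pyGetD xs i d = xs.getD i.toNat d := by
  conv_lhs => rw [show i = ((i.toNat : Nat) : Int) by omega]
  rw [PySem.List.pyGetD_natCast]

theorem pyGetD_pySetD_toNat {α : Type} (xs : List α) (i m : Int) (v d : α)
    (hi : 0 ≤ i) (hm : 0 ≤ m) (hlen : i.toNat < xs.length) :
    PySem.List.pyGetD (PySem.List.pySetD xs i v) m d =
      if m.toNat = i.toNat then v else xs.getD m.toNat d := by
  conv_lhs => rw [show i = ((i.toNat : Nat) : Int) by omega,
    show m = ((m.toNat : Nat) : Int) by omega]
  rw [PySem.List.pyGetD_pySetD_natCast _ _ _ _ _ hlen]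
  rw [PySem.List.pyGetD_natCast]

theorem getD_smSet (em : List (List Int)) (sm : List (List (Option (Int × Int))))
    (e : Int × Int) (v : Option (Int × Int)) (hd : dimsA em sm) (he : inRC em e) (i : Nat) :
    (smSet sm e v).getD i [] =
      if i = e.1.toNat then PySem.List.pySetD (sm.getD e.1.toNat []) e.2 v else sm.getD i [] := by
  have he1 : 0 ≤ e.1 := he.1
  have he2 : e.1 < (em.length : Int) := he.2.1
  have hlen : e.1.toNat < sm.length := by
    have hl := hd.1
    omega
  rw [← PySem.List.pyGetD_natCast (smSet sm e v) i []]
  unfold smSet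
  rw [pyGetD_pySetD_toNat sm e.1 (i : Int) _ [] he1 (by omega) hlen]
  rw [pyGetD_toNat sm e.1 [] he1]
  simp

theorem dims_smSet (em : List (List Int)) (sm : List (List (Option (Int × Int))))
    (e : Int × Int) (v : Option (Int × Int)) (hd : dimsA em sm) (he : inRC em e) :
    dimsA em (smSet sm e v) := by
  refine ⟨by unfold smSet; rw [PySem.List.length_pySetD]; exact hd.1, ?_⟩
  intro i hi
  rw [getD_smSet em sm e v hd he i]
  split
  · rw [PySem.List.length_pySetD]
    exact hd.2 e.1.toNat (by have h1 := he.1; have h2 := he.2.1; omega)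
  · exact hd.2 i hi

theorem entry_smSet (em : List (List Int)) (sm : List (List (Option (Int × Int))))
    (e : Int × Int) (v : Option (Int × Int)) (hd : dimsA em sm) (he : inRC em e)
    (i j : Nat) :
    entry (smSet sm e v) i j =
      if i = e.1.toNat ∧ j = e.2.toNat then v else entry sm i j := by
  have he1 : 0 ≤ e.1 := he.1
  have he2 : e.1 < (em.length : Int) := he.2.1
  have he3 : 0 ≤ e.2 := he.2.2.1
  have he4 : e.2 < ((CN em : Nat) : Int) := he.2.2.2
  unfold entry
  rw [getD_smSet em sm e v hd he i]
  by_cases hi : i = e.1.toNat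
  · rw [if_pos hi]
    have hrl : (sm.getD e.1.toNat []).length = CN em :=
      hd.2 e.1.toNat (by omega)
    have hjl : e.2.toNat < (sm.getD e.1.toNat []).length := by omega
    rw [← PySem.List.pyGetD_natCast (PySem.List.pySetD (sm.getD e.1.toNat []) e.2 v) j none]
    rw [pyGetD_pySetD_toNat _ e.2 (j : Int) _ none he3 (by omega) hjl]
    simp only [Int.toNat_natCast]
    by_cases hje : j = e.2.toNat
    · rw [if_pos hje, if_pos ⟨hi, hje⟩]
    · rw [if_neg hje, if_neg (by tauto), hi]
  · rw [if_neg hi, if_neg (by tauto)]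

theorem toNat_pair_inj (em : List (List Int)) (a b : Int × Int)
    (ha : inRC em a) (hb : inRC em b)
    (h1 : a.1.toNat = b.1.toNat) (h2 : a.2.toNat = b.2.toNat) : a = b := by
  obtain ⟨x1, y1⟩ := a
  obtain ⟨x2, y2⟩ := b
  obtain ⟨_, _, _, _⟩ := ha
  obtain ⟨_, _, _, _⟩ := hb
  simp_all
  omega

theorem foldSet_entry (em : List (List Int)) (v : Int × Int) :
    ∀ (path : List (Int × Int)) (sm : List (List (Option (Int × Int)))),
      dimsA em sm → (∀ e ∈ path, inRC em e) →
      dimsA em (path.foldl (fun sm e =>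
          PySem.List.pySetD sm e.1
            (PySem.List.pySetD (PySem.List.pyGetD sm e.1 []) e.2 (some v))) sm) ∧
      ∀ (c' : Int × Int), inRC em c' →
        (c' ∈ path → entry (path.foldl (fun sm e =>
            PySem.List.pySetD sm e.1
              (PySem.List.pySetD (PySem.List.pyGetD sm e.1 []) e.2 (some v))) sm)
            c'.1.toNat c'.2.toNat = some v) ∧
        (c' ∉ path → entry (path.foldl (fun sm e =>
            PySem.List.pySetD sm e.1
              (PySem.List.pySetD (PySem.List.pyGetD sm e.1 []) e.2 (some v))) sm)
            c'.1.toNat c'.2.toNat = entry sm c'.1.toNat c'.2.toNat) := by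
  intro path
  induction path with
  | nil => intro sm hd _; exact ⟨hd, fun c' _ => ⟨by simp, fun _ => rfl⟩⟩
  | cons e rest ih =>
    intro sm hd hall
    have hein : inRC em e := hall e (List.mem_cons_self)
    have hd' : dimsA em (smSet sm e (some v)) := dims_smSet em sm e (some v) hd hein
    rw [List.foldl_cons]
    rw [show PySem.List.pySetD sm e.1
        (PySem.List.pySetD (PySem.List.pyGetD sm e.1 []) e.2 (some v)) = smSet sm e (some v)
      from rfl]
    obtain ⟨ihd, ihe⟩ := ih (smSet sm e (some v)) hd' (fun x hx => hall x (List.mem_cons_of_mem e hx))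
    refine ⟨ihd, ?_⟩
    intro c' hc'
    constructor
    · intro hmem
      rcases List.mem_cons.1 hmem with rfl | hmem
      · by_cases hrest : c' ∈ rest
        · exact (ihe c' hc').1 hrest
        · rw [(ihe c' hc').2 hrest]
          rw [entry_smSet em sm c' (some v) hd hein c'.1.toNat c'.2.toNat]
          simp
      · exact (ihe c' hc').1 hmem
    · intro hnm
      have hnr : c' ∉ rest := fun hx => hnm (List.mem_cons_of_mem e hx)
      have hne : c' ≠ e := fun hx => hnm (hx ▸ List.mem_cons_self)
      rw [(ihe c' hc').2 hnr]
      rw [entry_smSet em sm e (some v) hd hein c'.1.toNat c'.2.toNat]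
      rw [if_neg]
      intro ⟨h1, h2⟩
      exact hne (toNat_pair_inj em c' e hc' hein h1 h2)

-- A's loop state and invariant
def InvA (em : List (List Int)) (P : List (Int × Int))
    (st : List (List (Option (Int × Int))) × PySem.Dict (Int × Int) String × Int) : Prop :=
  dimsA em st.1 ∧
  (∀ c : Int × Int, inRC em c →
    entry st.1 c.1.toNat c.2.toNat = none ∨ entry st.1 c.1.toNat c.2.toNat = some (Sf em c)) ∧
  (∀ c ∈ P, inRC em c → entry st.1 c.1.toNat c.2.toNat = some (Sf em c)) ∧
  (∀ (c : Int × Int) (s : Int × Int), inRC em c → entry st.1 c.1.toNat c.2.toNat = some s →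
    ((st.2.1).get? s).isSome) ∧
  st.2.1 = refDict em P ∧
  st.2.2 = 97 + ((st.2.1).size : Int)

def bodyA (em : List (List Int))
    (st : List (List (Option (Int × Int))) × PySem.Dict (Int × Int) String × Int)
    (c : Int × Int) : List (List (Option (Int × Int))) × PySem.Dict (Int × Int) String × Int :=
  let (sm, d, cnt) := st
  if PySem.List.pyGetD (PySem.List.pyGetD sm c.1 []) c.2 none ≠ none then st
  else
    let path := find_and_label (em.length * CN em + 2) em c.1 c.2
    let s0 := PySem.List.pyGetD path 0 (0, 0)
    let sm' := path.foldl (fun sm e =>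
      PySem.List.pySetD sm e.1 (PySem.List.pySetD (PySem.List.pyGetD sm e.1 []) e.2 (some s0))) sm
    match d.get? s0 with
    | some _ => (sm', d, cnt)
    | none => (sm', d.insert s0 (pyChr cnt), cnt + 1)

theorem bodyA_step (em : List (List Int)) (hpre : Pre2 em)
    (P : List (Int × Int))
    (st : List (List (Option (Int × Int))) × PySem.Dict (Int × Int) String × Int)
    (c : Int × Int) (hc : inRC em c) (hInv : InvA em P st) :
    InvA em (P ++ [c]) (bodyA em st c) := by
  obtain ⟨sm, d, cnt⟩ := st
  obtain ⟨hdims, hopt, hproc, hkeys, hdict, hcnt⟩ := hInv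
  have hread : PySem.List.pyGetD (PySem.List.pyGetD sm c.1 []) c.2 none
      = entry sm c.1.toNat c.2.toNat := entry_pyGetD sm c.1 c.2 hc.1 hc.2.2.1
  unfold bodyA
  dsimp only at hdims hopt hproc hkeys hdict hcnt ⊢
  rcases hopt c hc with hnone | hsome
  · -- unvisited: trace the path
    rw [if_neg (by simp only [hread, hnone, ne_eq, not_not])]
    obtain ⟨hne, hhead, hmem, hall⟩ := fal_eq em hpre (em.length * CN em)
      (em.length * CN em + 2) c.1 c.2
      (by obtain ⟨a, b⟩ := c; exact hc)
      (by obtain ⟨a, b⟩ := c; exact terminates em hpre (a, b) hc)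
      (by omega)
    have hceta : ((c.1, c.2) : Int × Int) = c := rfl
    rw [hceta] at hhead hmem hall
    rw [hhead]
    obtain ⟨hd', hent⟩ := foldSet_entry em (Sf em c)
      (find_and_label (em.length * CN em + 2) em c.1 c.2) sm
      hdims (fun e he => (hall e he).1)
    -- dict/cnt update by cases on membership of the sink
    have hmain : ∀ (d' : PySem.Dict (Int × Int) String) (cnt' : Int),
        d' = refDict em (P ++ [c]) → cnt' = 97 + (d'.size : Int) →
        ((d'.get? (Sf em c)).isSome) →
        InvA em (P ++ [c])
          (List.foldl (fun sm e =>
            PySem.List.pySetD sm e.1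
              (PySem.List.pySetD (PySem.List.pyGetD sm e.1 []) e.2 (some (Sf em c)))) sm
            (find_and_label (em.length * CN em + 2) em c.1 c.2), d', cnt') := by
      intro d' cnt' hd'' hcnt' hsin
      refine ⟨hd', ?_, ?_, ?_, hd'', hcnt'⟩
      · intro c' hc'
        by_cases hpmem : c' ∈ find_and_label (em.length * CN em + 2) em c.1 c.2
        · right
          rw [(hent c' hc').1 hpmem, (hall c' hpmem).2]
        · rw [(hent c' hc').2 hpmem]
          exact hopt c' hc'
      · intro c' hc'mem hc'
        by_cases hpmem : c' ∈ find_and_label (em.length * CN em + 2) em c.1 c.2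
        · rw [(hent c' hc').1 hpmem, (hall c' hpmem).2]
        · rw [(hent c' hc').2 hpmem]
          rcases List.mem_append.1 hc'mem with hmem' | hmem'
          · exact hproc c' hmem' hc'
          · simp at hmem'
            subst hmem'
            exact absurd hmem hpmem
      · intro c' s hc' hent'
        by_cases hpmem : c' ∈ find_and_label (em.length * CN em + 2) em c.1 c.2
        · rw [(hent c' hc').1 hpmem] at hent'
          cases hent'
          exact hsin
        · rw [(hent c' hc').2 hpmem] at hent'
          have := hkeys c' s hc' hent'
          rw [hdict] at this
          obtain ⟨v, hv⟩ := Option.isSome_iff_exists.1 this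
          rw [hd'', refDict_snoc]
          rw [Option.isSome_iff_exists]
          exact ⟨v, refStep_preserve em _ c s v hv⟩
    cases hget : d.get? (Sf em c) with
    | some ch =>
      refine hmain d cnt ?_ (by rw [hcnt]) (by rw [hget]; rfl)
      rw [refDict_snoc, ← hdict]
      unfold refStep
      rw [if_pos (by rw [hget]; rfl)]
    | none =>
      refine hmain (d.insert (Sf em c) (pyChr cnt)) (cnt + 1) ?_ ?_ ?_
      · rw [refDict_snoc, ← hdict]
        unfold refStep
        rw [if_neg (by rw [hget]; simp), hcnt]
      · rw [PySem.Dict.size_insert]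
        have hcont : d.contains (Sf em c) = false :=
          (PySem.Dict.get?_eq_none_iff_contains d (Sf em c)).mp hget
        rw [hcont]
        push_cast
        omega
      · rw [PySem.Dict.get?_insert]
        simp
  · -- already labelled: skip
    rw [if_pos (by simp only [hread, hsome, ne_eq]; simp)]
    refine ⟨hdims, hopt, ?_, hkeys, ?_, hcnt⟩
    · intro c' hc'mem hc'
      rcases List.mem_append.1 hc'mem with hmem' | hmem'
      · exact hproc c' hmem' hc'
      · simp at hmem'
        subst hmem'
        exact hsome
    · rw [refDict_snoc, ← hdict]
      unfold refStep
      rw [if_pos (hkeys c (Sf em c) hc hsome)]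

theorem loopA (em : List (List Int)) (hpre : Pre2 em) :
    ∀ (L P : List (Int × Int))
      (st : List (List (Option (Int × Int))) × PySem.Dict (Int × Int) String × Int),
      (∀ c ∈ L, inRC em c) → InvA em P st → InvA em (P ++ L) (L.foldl (bodyA em) st) := by
  intro L
  induction L with
  | nil => intro P st _ h; simpa using h
  | cons c L ih =>
    intro P st hL hInv
    rw [List.foldl_cons, show P ++ c :: L = (P ++ [c]) ++ L by simp]
    exact ih (P ++ [c]) (bodyA em st c) (fun x hx => hL x (List.mem_cons_of_mem c hx))
      (bodyA_step em hpre P st c (hL c List.mem_cons_self) hInv)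

theorem foldl_append_const {α β : Type} (x : α) :
    ∀ (l : List β) (init : List α),
      l.foldl (fun a _ => a ++ [x]) init = init ++ List.replicate l.length x := by
  intro l
  induction l with
  | nil => intro init; simp
  | cons b t ih =>
    intro init
    rw [List.foldl_cons, ih, List.append_assoc]
    simp [List.replicate_succ]

theorem foldl_nested {σ : Type} (F : σ → (Int × Int) → σ) (lI lJ : List Int) (init : σ) :
    lI.foldl (fun st i => lJ.foldl (fun st j => F st (i, j)) st) init
      = (lI.flatMap (fun i => lJ.map (fun j => (i, j)))).foldl F init := by
  rw [List.foldl_flatMap]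
  congr 1
  funext st i
  rw [List.foldl_map]

theorem mem_cellsL (em : List (List Int)) (c : Int × Int) :
    c ∈ cellsL em ↔ inRC em c := by
  unfold cellsL inRC
  rw [List.mem_flatMap]
  constructor
  · rintro ⟨i, hi, hj⟩
    rw [PySem.List.mem_pyRange_one] at hi
    rw [List.mem_map] at hj
    obtain ⟨j, hj, rfl⟩ := hj
    rw [PySem.List.mem_pyRange_one] at hj
    exact ⟨hi.1, hi.2, hj.1, hj.2⟩
  · intro h
    refine ⟨c.1, ?_, ?_⟩
    · rw [PySem.List.mem_pyRange_one]
      exact ⟨h.1, h.2.1⟩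
    · rw [List.mem_map]
      refine ⟨c.2, ?_, rfl⟩
      rw [PySem.List.mem_pyRange_one]
      exact ⟨h.2.2.1, h.2.2.2⟩

theorem portA_fold (em : List (List Int)) (lI lJ : List Int)
    (init : List (List (Option (Int × Int))) × PySem.Dict (Int × Int) String × Int) :
    lI.foldl (fun st i => lJ.foldl (fun st j =>
        let (sm, d, cnt) := st
        if PySem.List.pyGetD (PySem.List.pyGetD sm i []) j none ≠ none then st
        else
          let path := find_and_label (em.length * CN em + 2) em i j
          let s0 := PySem.List.pyGetD path 0 (0, 0)
          let sm' := path.foldl (fun sm e =>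
            PySem.List.pySetD sm e.1
              (PySem.List.pySetD (PySem.List.pyGetD sm e.1 []) e.2 (some s0))) sm
          match d.get? s0 with
          | some _ => (sm', d, cnt)
          | none => (sm', d.insert s0 (pyChr cnt), cnt + 1)) st) init
      = (lI.flatMap (fun i => lJ.map (fun j => (i, j)))).foldl (bodyA em) init := by
  rw [← foldl_nested (bodyA em)]
  rfl

theorem InvA_init (em : List (List Int)) :
    InvA em [] (List.replicate em.length (List.replicate (CN em) none),
      (PySem.Dict.empty : PySem.Dict (Int × Int) String), 97) := by
  have hentry : ∀ (i j : Nat),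
      entry (List.replicate em.length (List.replicate (CN em) (none : Option (Int × Int)))) i j
        = none := by
    intro i j
    unfold entry
    by_cases hi : i < em.length
    · rw [List.getD_eq_getElem (List.replicate em.length (List.replicate (CN em) none)) []
        (by simpa using hi)]
      rw [List.getElem_replicate]
      rw [List.getD_eq_getElem?_getD, List.getElem?_replicate]
      by_cases hj : j < CN em <;> simp [hj]
    · rw [List.getD_eq_default (List.replicate em.length (List.replicate (CN em) none)) []
        (by simpa using hi)]
      simp
  refine ⟨⟨by simp, ?_⟩, ?_, by simp, ?_, rfl, by simp [PySem.Dict.size, PySem.Dict.empty]⟩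
  · intro i hi
    rw [List.getD_eq_getElem _ _ (by simpa using hi)]
    simp
  · intro c _
    left
    exact hentry _ _
  · intro c s _ habs
    rw [hentry] at habs
    cases habs

theorem A_eq_ref (em : List (List Int)) (hpre : Pre2 em)
    (hne : em ≠ []) : sink_map em = refOut em := by
  have hlen : 0 < em.length := List.length_pos_of_ne_nil hne
  unfold sink_map
  simp only [head_pyGetD]
  rw [show (em.headD []).length = CN em from rfl]
  rw [foldl_append_const]
  rw [PySem.List.length_pyRange_one]
  rw [show ((em.length : Int) - 0).toNat = em.length by omega]
  simp only [List.nil_append]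
  rw [portA_fold]
  rw [show ((PySem.List.pyRange 0 (em.length : Int) 1).flatMap
      (fun i => (PySem.List.pyRange 0 ((CN em : Nat) : Int) 1).map (fun j => (i, j))))
    = cellsL em from rfl]
  have hInvF := loopA em hpre (cellsL em) []
    (List.replicate em.length (List.replicate (CN em) none), PySem.Dict.empty, 97)
    (fun c hc => (mem_cellsL em c).1 hc) (InvA_init em)
  simp only [List.nil_append] at hInvF
  obtain ⟨hdims, hopt, hproc, hkeys, hdict, hcnt⟩ := hInvF
  rw [hdims.1]
  rw [PySem.List.pyGetD_zero]
  rw [hdims.2 0 hlen]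
  unfold refOut
  apply List.map_congr_left
  intro i hi
  rw [PySem.List.mem_pyRange_one] at hi
  apply List.map_congr_left
  intro j hj
  rw [PySem.List.mem_pyRange_one] at hj
  have hcin : inRC em (i, j) := ⟨hi.1, hi.2, hj.1, hj.2⟩
  have hp := hproc (i, j) ((mem_cellsL em _).2 hcin) hcin
  dsimp only at hp
  rw [entry_pyGetD _ i j hi.1 hj.1, hp]
  simp only [Option.getD_some]
  rw [hdict]

-- B's memo invariant
def MInvB (em : List (List Int)) (memo : PySem.Dict (Int × Int) (Int × Int)) : Prop :=
  ∀ k v, memo.get? k = some v → inRC em k ∧ v = Sf em k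

theorem foldl_insert_MInv (em : List (List Int)) (s : Int × Int) :
    ∀ (stack : List (Int × Int)) (memo : PySem.Dict (Int × Int) (Int × Int)),
      MInvB em memo → (∀ e ∈ stack, inRC em e ∧ Sf em e = s) →
      MInvB em (stack.foldl (fun m c => m.insert c s) memo) := by
  intro stack
  induction stack with
  | nil => intro memo hm _; exact hm
  | cons e rest ih =>
    intro memo hm hs
    rw [List.foldl_cons]
    refine ih (memo.insert e s) ?_ (fun x hx => hs x (List.mem_cons_of_mem e hx))
    intro k v hk
    rw [PySem.Dict.get?_insert] at hk
    split at hk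
    · next hke =>
      cases hk
      obtain ⟨h1, h2⟩ := hs e List.mem_cons_self
      subst hke
      exact ⟨h1, h2.symm⟩
    · exact hm k v hk

theorem bLoop_hit (fuel : Nat) (em : List (List Int)) (rows cols : Int)
    (memo : PySem.Dict (Int × Int) (Int × Int)) (stack : List (Int × Int)) (i j : Int)
    (s : Int × Int) (h : memo.get? (i, j) = some s) :
    bLoop fuel em rows cols memo stack i j
      = (s, stack.foldl (fun m c => m.insert c s) memo) := by
  cases fuel with
  | zero => unfold bLoop; rw [h]
  | succ n => unfold bLoop; rw [h]

theorem bLoop_ins (n : Nat) (em : List (List Int)) (rows cols : Int)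
    (memo : PySem.Dict (Int × Int) (Int × Int)) (stack : List (Int × Int)) (i j : Int)
    (h : memo.get? (i, j) = none)
    (hcase : bestNbr em rows cols i j = none ∨
      ∃ b, bestNbr em rows cols i j = some b ∧ cellAt em b.1 b.2 > cellAt em i j) :
    bLoop (n + 1) em rows cols memo stack i j
      = bLoop n em rows cols (memo.insert (i, j) (i, j)) stack i j := by
  rcases hcase with hb | ⟨b, hb, hgt⟩
  · conv_lhs => rw [bLoop.eq_def]; rw [h, hb]
  · conv_lhs => rw [bLoop.eq_def]; rw [h, hb]
    dsimp only
    rw [if_pos hgt]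

theorem bLoop_move (n : Nat) (em : List (List Int)) (rows cols : Int)
    (memo : PySem.Dict (Int × Int) (Int × Int)) (stack : List (Int × Int)) (i j : Int)
    (b : Int × Int) (h : memo.get? (i, j) = none)
    (hb : bestNbr em rows cols i j = some b) (hgt : ¬ cellAt em b.1 b.2 > cellAt em i j) :
    bLoop (n + 1) em rows cols memo stack i j
      = bLoop n em rows cols memo (stack ++ [(i, j)]) b.1 b.2 := by
  conv_lhs => rw [bLoop.eq_def]; rw [h, hb]
  dsimp only
  rw [if_neg hgt]

theorem bLoop_spec (em : List (List Int)) (hpre : Pre2 em) :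
    ∀ (fuel : Nat) (n : Nat) (ci cj : Int) (memo : PySem.Dict (Int × Int) (Int × Int))
      (stack : List (Int × Int)), inRC em (ci, cj) → MInvB em memo →
      TermLe em (ci, cj) n →
      (∀ e ∈ stack, inRC em e ∧ Sf em e = Sf em (ci, cj)) → n + 2 ≤ fuel →
      ∃ memo2, bLoop fuel em (em.length : Int) ((CN em : Nat) : Int) memo stack ci cj
        = (Sf em (ci, cj), memo2) ∧ MInvB em memo2 := by
  intro fuel
  induction fuel with
  | zero => intro n ci cj memo stack _ _ _ _ h; omega
  | succ f ih =>
    intro n ci cj memo stack hc hm ht hs hf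
    cases hget : memo.get? (ci, cj) with
    | some s =>
      obtain ⟨_, hv⟩ := hm _ _ hget
      rw [bLoop_hit _ em _ _ memo stack ci cj s hget]
      subst hv
      exact ⟨_, rfl, foldl_insert_MInv em _ stack memo hm hs⟩
    | none =>
      have hsink : ∀ (hS : Sf em (ci, cj) = (ci, cj))
          (hcase : bestNbr em (em.length : Int) ((CN em : Nat) : Int) ci cj = none ∨
            ∃ b, bestNbr em (em.length : Int) ((CN em : Nat) : Int) ci cj = some b ∧
              cellAt em b.1 b.2 > cellAt em ci cj),
          ∃ memo2, bLoop (f + 1) em (em.length : Int) ((CN em : Nat) : Int) memo stack ci cj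
            = (Sf em (ci, cj), memo2) ∧ MInvB em memo2 := by
        intro hS hcase
        rw [bLoop_ins f em _ _ memo stack ci cj hget hcase]
        have hm' : MInvB em (memo.insert (ci, cj) (ci, cj)) := by
          intro k v hk
          rw [PySem.Dict.get?_insert] at hk
          split at hk
          · next hke =>
            cases hk
            subst hke
            exact ⟨hc, hS.symm⟩
          · exact hm k v hk
        rw [bLoop_hit f em _ _ _ stack ci cj (ci, cj) (by rw [PySem.Dict.get?_insert]; simp)]
        rw [hS]
        exact ⟨_, rfl, foldl_insert_MInv em _ stack _ hm' (by rw [hS] at hs; exact hs)⟩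
      cases hb : bestNbr em (em.length : Int) ((CN em : Nat) : Int) ci cj with
      | none =>
        have hstep : stepS em (ci, cj) = none := stepS_eq_none_of_bnone em (ci, cj) hb
        exact hsink (Sf_step_none em (ci, cj) hstep) (Or.inl hb)
      | some b =>
        obtain ⟨bi, bj⟩ := b
        by_cases hgt : cellAt em bi bj > cellAt em ci cj
        · have hstep : stepS em (ci, cj) = none :=
            stepS_eq_none_of_gt em (ci, cj) (bi, bj) hb hgt
          exact hsink (Sf_step_none em (ci, cj) hstep) (Or.inr ⟨(bi, bj), hb, hgt⟩)
        · have hstep : stepS em (ci, cj) = some (bi, bj) :=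
            stepS_eq_some_of_le em (ci, cj) (bi, bj) hb hgt
          have hbin : inRC em (bi, bj) := (step_some em _ _ hstep).1
          have hSf : Sf em (ci, cj) = Sf em (bi, bj) :=
            Sf_step_some em hpre (ci, cj) (bi, bj) hstep
          rw [bLoop_move f em _ _ memo stack ci cj (bi, bj) hget hb hgt]
          have hn1 : 1 ≤ n := termle_pos em (ci, cj) (bi, bj) n ht hstep
          obtain ⟨n, rfl⟩ : ∃ g, n = g + 1 := ⟨n - 1, by omega⟩
          obtain ⟨memo2, heq, hm2⟩ := ih n bi bj memo (stack ++ [(ci, cj)]) hbin hm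
            (termle_shift em (ci, cj) (bi, bj) n ht hstep)
            (by
              intro e he
              rcases List.mem_append.1 he with he | he
              · obtain ⟨h1, h2⟩ := hs e he
                exact ⟨h1, by rw [h2, hSf]⟩
              · simp at he
                subst he
                exact ⟨hc, hSf⟩)
            (by omega)
          exact ⟨memo2, by rw [heq, hSf], hm2⟩

def charF (em : List (List Int)) (c : Int × Int) : String :=
  (refDict em (cellsL em)).getD (Sf em c) ""

theorem getD_eq_charF (em : List (List Int)) (P Q : List (Int × Int)) (c : Int × Int)
    (h : cellsL em = (P ++ [c]) ++ Q) :
    (refDict em (P ++ [c])).getD (Sf em c) "" = charF em c := by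
  have hsome : ((refDict em (P ++ [c])).get? (Sf em c)).isSome := by
    rw [refDict_snoc]
    exact refStep_self em _ c
  obtain ⟨v, hv⟩ := Option.isSome_iff_exists.1 hsome
  have hfinal : (refDict em (cellsL em)).get? (Sf em c) = some v := by
    rw [h]
    exact refDict_stable em _ Q _ _ hv
  unfold charF
  unfold PySem.Dict.getD
  rw [hv, hfinal]

theorem loopB_inner (em : List (List Int)) (hpre : Pre2 em)
    (i : Int) (hi0 : 0 ≤ i) (hiR : i < (em.length : Int)) :
    ∀ (n : Nat) (j : Int) (memo : PySem.Dict (Int × Int) (Int × Int))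
      (labels : PySem.Dict (Int × Int) String) (row : List String) (P F : List (Int × Int)),
      0 ≤ j → j + (n : Int) = ((CN em : Nat) : Int) →
      MInvB em memo → labels = refDict em P →
      cellsL em = P ++ (PySem.List.pyRange j ((CN em : Nat) : Int) 1).map (fun q => (i, q)) ++ F →
      ∃ memo2,
        (PySem.List.pyRange j ((CN em : Nat) : Int) 1).foldl
          (fun st2 j =>
            let (memo, labels, row) := st2
            let r := bLoop (em.length * CN em + 2) em (em.length : Int) ((CN em : Nat) : Int) memo [] i j
            let labels' := if (labels.get? r.1).isSome then labels
                           else labels.insert r.1 (pyChr (97 + (labels.size : Int)))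
            (r.2, labels', row ++ [labels'.getD r.1 ""])) (memo, labels, row)
        = (memo2,
           refDict em (P ++ (PySem.List.pyRange j ((CN em : Nat) : Int) 1).map (fun q => (i, q))),
           row ++ (PySem.List.pyRange j ((CN em : Nat) : Int) 1).map (fun q => charF em (i, q)))
        ∧ MInvB em memo2 := by
  intro n
  induction n with
  | zero =>
    intro j memo labels row P F hj0 hjn hm hl hdec
    have hje : ((CN em : Nat) : Int) ≤ j := by push_cast at hjn; omega
    rw [PySem.List.pyRange_one_eq_nil hje]
    exact ⟨memo, by simp [hl], hm⟩
  | succ n ih =>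
    intro j memo labels row P F hj0 hjn hm hl hdec
    have hjC : j < ((CN em : Nat) : Int) := by
      push_cast at hjn ⊢
      omega
    rw [PySem.List.pyRange_one_cons hjC, List.foldl_cons]
    have hcin : inRC em (i, j) := ⟨hi0, hiR, hj0, hjC⟩
    obtain ⟨memo2, hbl, hm2⟩ := bLoop_spec em hpre (em.length * CN em + 2) (em.length * CN em)
      i j memo [] hcin hm (terminates em hpre (i, j) hcin) (by simp) (by omega)
    dsimp only
    rw [hbl]
    dsimp only
    rw [show (if ((labels.get? (Sf em (i, j))).isSome) then labels
        else labels.insert (Sf em (i, j)) (pyChr (97 + (labels.size : Int))))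
      = refStep em labels (i, j) from rfl]
    have hl' : refStep em labels (i, j) = refDict em (P ++ [(i, j)]) := by
      rw [hl, ← refDict_snoc]
    rw [hl']
    have hdec2 : cellsL em
        = (P ++ [(i, j)]) ++ (PySem.List.pyRange (j + 1) ((CN em : Nat) : Int) 1).map
            (fun q => (i, q)) ++ F := by
      rw [hdec, PySem.List.pyRange_one_cons hjC]
      simp
    have hchar : (refDict em (P ++ [(i, j)])).getD (Sf em (i, j)) "" = charF em (i, j) :=
      getD_eq_charF em P
        ((PySem.List.pyRange (j + 1) ((CN em : Nat) : Int) 1).map (fun q => (i, q)) ++ F)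
        (i, j) (by rw [hdec2]; simp)
    rw [hchar]
    obtain ⟨memo3, hfold, hm3⟩ := ih (j + 1) memo2 (refDict em (P ++ [(i, j)]))
      (row ++ [charF em (i, j)]) (P ++ [(i, j)]) F (by omega)
      (by push_cast at hjn ⊢; omega) hm2 rfl hdec2
    refine ⟨memo3, ?_, hm3⟩
    rw [hfold]
    simp [List.append_assoc]

theorem loopB_outer (em : List (List Int)) (hpre : Pre2 em) :
    ∀ (n : Nat) (i : Int) (memo : PySem.Dict (Int × Int) (Int × Int))
      (labels : PySem.Dict (Int × Int) String) (out : List (List String))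
      (P : List (Int × Int)),
      0 ≤ i → i + (n : Int) = (em.length : Int) →
      MInvB em memo → labels = refDict em P →
      cellsL em = P ++ (PySem.List.pyRange i (em.length : Int) 1).flatMap
        (fun p => (PySem.List.pyRange 0 ((CN em : Nat) : Int) 1).map (fun q => (p, q))) →
      ∃ memo2 labels2,
        (PySem.List.pyRange i (em.length : Int) 1).foldl
          (fun st i =>
            let inner := (PySem.List.pyRange 0 ((CN em : Nat) : Int) 1).foldl
              (fun st2 j =>
                let (memo, labels, row) := st2
                let r := bLoop (em.length * CN em + 2) em (em.length : Int) ((CN em : Nat) : Int) memo [] i j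
                let labels' := if (labels.get? r.1).isSome then labels
                               else labels.insert r.1 (pyChr (97 + (labels.size : Int)))
                (r.2, labels', row ++ [labels'.getD r.1 ""])) (st.1, st.2.1, [])
            (inner.1, inner.2.1, st.2.2 ++ [inner.2.2])) (memo, labels, out)
        = (memo2, labels2,
           out ++ (PySem.List.pyRange i (em.length : Int) 1).map
             (fun p => (PySem.List.pyRange 0 ((CN em : Nat) : Int) 1).map
               (fun q => charF em (p, q)))) := by
  intro n
  induction n with
  | zero =>
    intro i memo labels out P hi0 hin hm hl hdec
    have hie : (em.length : Int) ≤ i := by push_cast at hin; omega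
    rw [PySem.List.pyRange_one_eq_nil hie]
    exact ⟨memo, labels, by simp⟩
  | succ n ih =>
    intro i memo labels out P hi0 hin hm hl hdec
    have hiR : i < (em.length : Int) := by
      push_cast at hin ⊢
      omega
    rw [PySem.List.pyRange_one_cons hiR, List.foldl_cons]
    have hdec1 : cellsL em
        = P ++ (PySem.List.pyRange 0 ((CN em : Nat) : Int) 1).map (fun q => (i, q))
          ++ (PySem.List.pyRange (i + 1) (em.length : Int) 1).flatMap
            (fun p => (PySem.List.pyRange 0 ((CN em : Nat) : Int) 1).map (fun q => (p, q))) := by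
      rw [hdec, PySem.List.pyRange_one_cons hiR]
      simp
    obtain ⟨memo2, hfold, hm2⟩ := loopB_inner em hpre i hi0 hiR (CN em) 0 memo labels [] P
      ((PySem.List.pyRange (i + 1) (em.length : Int) 1).flatMap
        (fun p => (PySem.List.pyRange 0 ((CN em : Nat) : Int) 1).map (fun q => (p, q))))
      (le_refl 0) (by simp) hm hl hdec1
    dsimp only
    rw [List.nil_append] at hfold
    rw [hfold]
    dsimp only
    obtain ⟨memo3, labels3, hfold2⟩ := ih (i + 1) memo2
      (refDict em (P ++ (PySem.List.pyRange 0 ((CN em : Nat) : Int) 1).map (fun q => (i, q))))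
      (out ++ [(PySem.List.pyRange 0 ((CN em : Nat) : Int) 1).map (fun q => charF em (i, q))])
      (P ++ (PySem.List.pyRange 0 ((CN em : Nat) : Int) 1).map (fun q => (i, q)))
      (by omega) (by push_cast at hin; omega) hm2 rfl
      (by rw [hdec1])
    refine ⟨memo3, labels3, ?_⟩
    rw [hfold2]
    simp [List.append_assoc]

theorem B_eq_ref (em : List (List Int)) (hpre : Pre2 em)
    (hne : em ≠ []) : sink_map_alt em = refOut em := by
  have hlen0 : ¬ em.length = 0 := by simpa using hne
  unfold sink_map_alt
  dsimp only
  simp only [head_pyGetD]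
  rw [show (if em.length = 0 then (0 : Int) else ((em.headD []).length : Int))
    = ((CN em : Nat) : Int) from by rw [if_neg hlen0]; rfl]
  rw [show (em.headD []).length = CN em from rfl]
  obtain ⟨memo2, labels2, hfold⟩ := loopB_outer em hpre em.length 0
    PySem.Dict.empty PySem.Dict.empty [] []
    (le_refl 0) (by omega)
    (by intro k v h; rw [PySem.Dict.get?_empty] at h; cases h) rfl
    (by rw [List.nil_append]; rfl)
  rw [hfold]
  rw [List.nil_append]
  simp [refOut, charF]

-- ===== VERDICT (by name: the statement is the Claim_ definition above) =====
theorem sink_map_spec : Claim_equal_sink_map := by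
  intro em hdom hpre
  unfold Spec_sink_map
  by_cases hne : em = []
  · subst hne
    decide
  · have hp2 : Pre2 em := (pre_cases em hpre).resolve_left hne
    rw [A_eq_ref em hp2 hne, B_eq_ref em hp2 hne]
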